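-- pv_equiv track=rewrite | github.com/mariia-rybakova/AlbumDesigner | utils/selection/testing_selection.py | allocate_simple_by_group_size
-- ===== SOURCE A (Python) =====
-- def allocate_simple_by_group_size(groups: dict, need: int, small_threshold: int = 5) -> dict:
--     """
--     groups: {group_key: [row_idx, ...]}
--     need: total items to select
--     small_threshold: groups with size <= this stay at 1 during the first pass
--
--     Returns: {group_key: m_to_select}
--     """
--     group_sizes = {g: len(idx_list) for g, idx_list in groups.items()}
--     keys = list(group_sizes.keys())
--     G = len(keys)
--
--     # Edge cases
--     if need <= 0 or G == 0:
--         return {g: 0 for g in keys}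
--
--     # Start with 1 each (coverage), capped by capacity
--     alloc = {g: min(1, group_sizes[g]) for g in keys}
--     already = sum(alloc.values())
--
--     # If fewer slots than groups: keep the biggest `need` groups at 1, others 0
--     if need < G:
--         # zero-out all, then set 1 for top-need by size
--         alloc = {g: 0 for g in keys}
--         for g in sorted(keys, key=lambda k: group_sizes[k], reverse=True)[:need]:
--             alloc[g] = 1
--         return alloc
--
--     remaining = need - already
--     if remaining <= 0:
--         return alloc
--
--     # ---- Pass 1: add extras to large groups only, but DO NOT take a group fully yet ----
--     # Soft cap = size-1 (leave at least one unselected), and skip small groups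
--     large_groups = [g for g in sorted(keys, key=lambda k: group_sizes[k], reverse=True)
--                     if group_sizes[g] > small_threshold and group_sizes[g] > 1]
--
--     # Distribute one-by-one in round-robins over large groups until remaining is 0
--     # or all large groups hit soft caps
--     progressed = True
--     while remaining > 0 and progressed:
--         progressed = False
--         for g in large_groups:
--             soft_cap = max(0, group_sizes[g] - 1)   # don't take the full group in pass 1
--             if alloc[g] < soft_cap:
--                 alloc[g] += 1
--                 remaining -= 1
--                 progressed = True
--                 if remaining == 0:
--                     break
--
--     if remaining <= 0:
--         return alloc
--
--     # ---- Pass 2: if still short, allow filling to full capacity (largest groups first) ----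
--     for g in large_groups:
--         cap = group_sizes[g]
--         if alloc[g] < cap and remaining > 0:
--             take = min(cap - alloc[g], remaining)
--             alloc[g] += take
--             remaining -= take
--             if remaining == 0:
--                 break
--
--     if remaining <= 0:
--         return alloc
--
--     # ---- Pass 3: finally, if still short, try medium/small groups (while respecting capacity) ----
--     others = [g for g in sorted(keys, key=lambda k: group_sizes[k], reverse=True)
--               if g not in large_groups and group_sizes[g] > 1]
--     for g in others:
--         cap = group_sizes[g]
--         if alloc[g] < cap and remaining > 0:
--             # still try not to fully consume tiny groups if we have alternatives
--             soft_cap = max(1, min(cap - 1, cap)) if len(others) > 1 else cap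
--             target = min(soft_cap, cap)
--             if alloc[g] < target:
--                 take = min(target - alloc[g], remaining)
--                 alloc[g] += take
--                 remaining -= take
--                 if remaining == 0:
--                     break
--
--     # If there's still remaining (rare), fill any capacity left anywhere
--     if remaining > 0:
--         for g in sorted(keys, key=lambda k: group_sizes[k], reverse=True):
--             cap = group_sizes[g]
--             if alloc[g] < cap and remaining > 0:
--                 take = min(cap - alloc[g], remaining)
--                 alloc[g] += take
--                 remaining -= take
--                 if remaining == 0:
--                     break
--
--     return alloc
-- ===== SOURCE B (Python) =====
-- def allocate_simple_by_group_size(groups: dict, need: int, small_threshold: int = 5) -> dict: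
--     """Closed-form re-implementation: pass-1 round-robin replaced by water-filling
--     (fill level R + remainder to the first groups in priority order); every group's
--     final value is then computed directly, no per-unit loop."""
--     sizes = {g: len(v) for g, v in groups.items()}
--     keys = list(sizes)
--     G = len(keys)
--     if need <= 0 or G == 0:
--         return {g: 0 for g in keys}
--     order = sorted(keys, key=lambda k: sizes[k], reverse=True)  # stable, biggest first
--     if need < G:
--         chosen = set(order[:need])
--         return {g: (1 if g in chosen else 0) for g in keys}
--     rem = need - sum(1 for g in keys if sizes[g] > 0)
--     if rem <= 0:
--         return {g: min(1, sizes[g]) for g in keys}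
--
--     large = [g for g in order if sizes[g] > small_threshold and sizes[g] > 1]
--     # ---- pass 1, closed form: extra capacity of a large group before its soft cap
--     # (size-1) is e_g = size-2; find level R = max k with sum(min(k, e_g)) <= rem,
--     # hand the remainder to the first groups (in `order`) still below their cap.
--     es = sorted(sizes[g] - 2 for g in large)
--     n = len(es)
--     total_e = sum(es)
--     if total_e <= rem:
--         R, used = (es[-1] if n else 0), total_e
--     else:
--         prev = acc = 0
--         R = used = 0
--         for i, e in enumerate(es):
--             step = acc + (n - i) * (e - prev)
--             if step > rem:
--                 R = prev + (rem - acc) // (n - i)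
--                 used = acc + (n - i) * (R - prev)
--                 break
--             acc, prev = step, e
--     leftover = rem - used
--     extra1 = set()
--     if total_e > rem:
--         for g in large:
--             if len(extra1) >= leftover:
--                 break
--             if sizes[g] - 2 > R:
--                 extra1.add(g)
--         leftover = 0
--     a1 = {g: 1 + min(R, sizes[g] - 2) + (1 if g in extra1 else 0) for g in large}
--     rem = leftover
--     if rem == 0:
--         return {g: a1.get(g, min(1, sizes[g])) for g in keys}
--
--     # ---- pass 2, closed form: all large are at size-1; the first min(rem, |large|)
--     # of them take their last slot.
--     full2 = set(large[:min(rem, len(large))])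
--     rem -= len(full2)
--     a2 = {g: sizes[g] - 1 + (1 if g in full2 else 0) for g in large}
--     if rem == 0:
--         return {g: a2.get(g, min(1, sizes[g])) for g in keys}
--
--     # ---- pass 3: medium groups (1 < size <= threshold), biggest first; with more
--     # than one of them each is filled only to size-1, a single one to its size.
--     others = [g for g in order if g not in a2 and sizes[g] > 1]
--     a3 = dict(a2)
--     for g in others:
--         room = sizes[g] - 1 if len(others) > 1 else sizes[g]
--         take = min(room - 1, rem)
--         a3[g] = 1 + take
--         rem -= take
--         if rem == 0:
--             break
--     if rem > 0:
--         # final top-up: only the multi-`others` groups can still have room (one slot each)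
--         for g in others:
--             if a3.get(g, 1) < sizes[g] and rem > 0:
--                 a3[g] = a3.get(g, 1) + 1
--                 rem -= 1
--     return {g: a3.get(g, min(1, sizes[g])) for g in keys}
-- ===== Notes on version B (the rewrite author's own statement) =====
-- stated objective: alternative
-- what changed: A's pass-1 one-unit-per-iteration round-robin is replaced by closed-form water-filling (fill level found by prefix sums over the sorted extra capacities, remainder handed to the first groups in priority order), and every group's final count is then written once from closed-form quantities instead of mutating a dict across passes.
import Mathlib
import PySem

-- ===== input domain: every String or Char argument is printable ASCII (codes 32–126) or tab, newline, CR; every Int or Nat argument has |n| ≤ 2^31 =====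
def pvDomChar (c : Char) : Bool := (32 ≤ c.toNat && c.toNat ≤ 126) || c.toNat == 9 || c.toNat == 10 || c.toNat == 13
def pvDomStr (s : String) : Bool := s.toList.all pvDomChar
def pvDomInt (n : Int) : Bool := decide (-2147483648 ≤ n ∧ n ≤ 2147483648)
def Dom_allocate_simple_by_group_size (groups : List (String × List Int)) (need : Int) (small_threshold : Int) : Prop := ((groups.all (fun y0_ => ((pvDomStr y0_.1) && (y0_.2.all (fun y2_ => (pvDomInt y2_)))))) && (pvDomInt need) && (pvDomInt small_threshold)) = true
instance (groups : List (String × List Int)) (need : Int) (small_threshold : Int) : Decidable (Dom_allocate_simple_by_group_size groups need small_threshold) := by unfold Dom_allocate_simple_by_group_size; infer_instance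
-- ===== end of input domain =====

-- B replaces A's one-unit-at-a-time round-robin (pass 1) by a closed-form water-filling
-- level computed on the sorted capacities, and every group's final count is then written
-- once from that closed form (no per-unit loop).

-- ===== PORT A =====

-- group_sizes = {g: len(idx_list) for g, idx_list in groups.items()}  (dict built over the input pairs)
def pvSizes (groups : List (String × List Int)) : PySem.Dict String Int :=
  groups.foldl (fun d p => d.insert p.1 (p.2.length : Int)) PySem.Dict.empty

-- one `for g in large_groups` round of A's pass-1 while-loop (alloc, remaining, progressed)
def pvRound1 (sizes : PySem.Dict String Int) (large : List String)
    (alloc : PySem.Dict String Int) (remaining : Int) (progressed : Bool) :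
    PySem.Dict String Int × Int × Bool :=
  match large with
  | [] => (alloc, remaining, progressed)
  | g :: rest =>
    let soft_cap := max 0 (sizes.getD g 0 - 1)
    if alloc.getD g 0 < soft_cap then
      let alloc' := alloc.insert g (alloc.getD g 0 + 1)   -- alloc[g] += 1 (key always present)
      if remaining - 1 = 0 then (alloc', remaining - 1, true)
      else pvRound1 sizes rest alloc' (remaining - 1) true
    else pvRound1 sizes rest alloc remaining progressed

-- a round that reports progress strictly decreases `remaining`, and never below 0 (for termination)
theorem pvRound1_bounds (sizes : PySem.Dict String Int) (large : List String)
    (alloc : PySem.Dict String Int) (remaining : Int) (progressed : Bool)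
    (h : 0 < remaining) :
    0 ≤ (pvRound1 sizes large alloc remaining progressed).2.1 ∧
    (pvRound1 sizes large alloc remaining progressed).2.1 ≤ remaining ∧
    ((pvRound1 sizes large alloc remaining progressed).2.2 = true →
      progressed = true ∨ (pvRound1 sizes large alloc remaining progressed).2.1 < remaining) := by
  induction large generalizing alloc remaining progressed with
  | nil => simpa [pvRound1] using h.le
  | cons g rest ih =>
    simp only [pvRound1]
    split
    · split
      · simp_all; omega
      · have := ih (alloc.insert g (alloc.getD g 0 + 1)) (remaining - 1) true (by omega)
        refine ⟨this.1, by omega, fun _ => Or.inr (by omega)⟩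
    · exact ih alloc remaining progressed h

-- the while-loop of pass 1
def pvLoop1 (sizes : PySem.Dict String Int) (large : List String)
    (alloc : PySem.Dict String Int) (remaining : Int) : PySem.Dict String Int × Int :=
  if h : 0 < remaining then
    let t := pvRound1 sizes large alloc remaining false
    if hp : t.2.2 = true then pvLoop1 sizes large t.1 t.2.1
    else (t.1, t.2.1)
  else (alloc, remaining)
termination_by remaining.toNat
decreasing_by
  have hb := pvRound1_bounds sizes large alloc remaining false h
  rcases hb.2.2 hp with h' | h'
  · exact absurd h' (by simp)
  · omega

-- `for g in L: cap = sizes[g]; if alloc[g] < cap and remaining > 0: take = …; break at 0`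
-- (A's pass 2 and A's final fill are this same loop, over `large_groups` resp. all keys sorted)
def pvFill (sizes : PySem.Dict String Int) (l : List String)
    (alloc : PySem.Dict String Int) (remaining : Int) : PySem.Dict String Int × Int :=
  match l with
  | [] => (alloc, remaining)
  | g :: rest =>
    let cap := sizes.getD g 0
    if alloc.getD g 0 < cap ∧ 0 < remaining then
      let take := min (cap - alloc.getD g 0) remaining
      let alloc' := alloc.insert g (alloc.getD g 0 + take)
      if remaining - take = 0 then (alloc', remaining - take)
      else pvFill sizes rest alloc' (remaining - take)
    else pvFill sizes rest alloc remaining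

-- A's pass 3 over `others` (othersLen = len(others), read by the soft-cap rule)
def pvPass3 (sizes : PySem.Dict String Int) (others : List String) (othersLen : Nat)
    (alloc : PySem.Dict String Int) (remaining : Int) : PySem.Dict String Int × Int :=
  match others with
  | [] => (alloc, remaining)
  | g :: rest =>
    let cap := sizes.getD g 0
    if alloc.getD g 0 < cap ∧ 0 < remaining then
      let soft_cap := if 1 < othersLen then max 1 (min (cap - 1) cap) else cap
      let target := min soft_cap cap
      if alloc.getD g 0 < target then
        let take := min (target - alloc.getD g 0) remaining
        let alloc' := alloc.insert g (alloc.getD g 0 + take)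
        if remaining - take = 0 then (alloc', remaining - take)
        else pvPass3 sizes rest othersLen alloc' (remaining - take)
      else pvPass3 sizes rest othersLen alloc remaining
    else pvPass3 sizes rest othersLen alloc remaining

def allocate_simple_by_group_size (groups : List (String × List Int)) (need : Int) (small_threshold : Int) : List (String × Int) :=
  let group_sizes := pvSizes groups
  let keys := group_sizes.keys
  let G : Int := (keys.length : Int)
  if need ≤ 0 ∨ G = 0 then
    (keys.foldl (fun d g => d.insert g 0) PySem.Dict.empty).items
  else
    let alloc := keys.foldl (fun d g => d.insert g (min 1 (group_sizes.getD g 0))) PySem.Dict.empty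
    let already := alloc.values.sum
    if need < G then
      let zeroed := keys.foldl (fun d g => d.insert g 0) PySem.Dict.empty
      let sortedKeys := PySem.List.sorted keys (fun k => group_sizes.getD k 0) true
      -- sorted(...)[:need] with 0 < need here, so `take need.toNat` is exact
      ((sortedKeys.take need.toNat).foldl (fun d g => d.insert g 1) zeroed).items
    else
      let remaining := need - already
      if remaining ≤ 0 then alloc.items
      else
        let sortedKeys := PySem.List.sorted keys (fun k => group_sizes.getD k 0) true
        let large := sortedKeys.filter
          (fun g => small_threshold < group_sizes.getD g 0 && 1 < group_sizes.getD g 0)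
        let t1 := pvLoop1 group_sizes large alloc remaining
        if t1.2 ≤ 0 then t1.1.items
        else
          let t2 := pvFill group_sizes large t1.1 t1.2
          if t2.2 ≤ 0 then t2.1.items
          else
            let others := sortedKeys.filter
              (fun g => !large.contains g && 1 < group_sizes.getD g 0)
            let t3 := pvPass3 group_sizes others others.length t2.1 t2.2
            if 0 < t3.2 then (pvFill group_sizes sortedKeys t3.1 t3.2).1.items
            else t3.1.items

-- ===== PORT B =====

-- B's water-level search on the ascending extra-capacity list (R, used); (0,0) if the
-- loop runs out (the for-else case, unreachable when total_e > rem)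
def pvFindLevel (rem n : Int) (es : List Int) (i acc prev : Int) : Int × Int :=
  match es with
  | [] => (0, 0)
  | e :: rest =>
    let step := acc + (n - i) * (e - prev)
    if rem < step then
      let R := prev + PySem.Int.floordiv (rem - acc) (n - i)
      (R, acc + (n - i) * (R - prev))
    else pvFindLevel rem n rest (i + 1) step e

-- first groups of `large` (priority order) above level R, until the set holds `leftover` of them
def pvExtras (sizes : PySem.Dict String Int) (large : List String) (leftover R : Int)
    (acc : PySem.Set String) : PySem.Set String :=
  match large with
  | [] => acc
  | g :: rest =>
    if leftover ≤ (PySem.Set.len acc : Int) then acc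
    else if R < sizes.getD g 0 - 2 then pvExtras sizes rest leftover R (PySem.Set.add acc g)
    else pvExtras sizes rest leftover R acc

-- B's pass-3 loop: each `other` is written once with its closed-form take
def pvPass3B (sizes : PySem.Dict String Int) (others : List String) (othersLen : Nat)
    (a3 : PySem.Dict String Int) (rem : Int) : PySem.Dict String Int × Int :=
  match others with
  | [] => (a3, rem)
  | g :: rest =>
    let room := if 1 < othersLen then sizes.getD g 0 - 1 else sizes.getD g 0
    let take := min (room - 1) rem
    let a3' := a3.insert g (1 + take)
    if rem - take = 0 then (a3', rem - take)
    else pvPass3B sizes rest othersLen a3' (rem - take)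

-- B's final top-up: one last slot per still-open group
def pvTopUp (sizes : PySem.Dict String Int) (others : List String)
    (a3 : PySem.Dict String Int) (rem : Int) : PySem.Dict String Int × Int :=
  match others with
  | [] => (a3, rem)
  | g :: rest =>
    if a3.getD g 1 < sizes.getD g 0 ∧ 0 < rem then
      pvTopUp sizes rest (a3.insert g (a3.getD g 1 + 1)) (rem - 1)
    else pvTopUp sizes rest a3 rem

def allocate_simple_by_group_size_alt (groups : List (String × List Int)) (need : Int) (small_threshold : Int) : List (String × Int) :=
  let sizes := pvSizes groups
  let keys := sizes.keys
  let G : Int := (keys.length : Int)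
  if need ≤ 0 ∨ G = 0 then
    (keys.foldl (fun d g => d.insert g 0) PySem.Dict.empty).items
  else
    let order := PySem.List.sorted keys (fun k => sizes.getD k 0) true
    if need < G then
      let chosen := PySem.Set.ofList (order.take need.toNat)  -- order[:need], 0 < need here
      (keys.foldl (fun d g => d.insert g (if chosen.contains g then 1 else 0)) PySem.Dict.empty).items
    else
      let rem0 := need - (keys.countP (fun g => 0 < sizes.getD g 0) : Int)
      if rem0 ≤ 0 then
        (keys.foldl (fun d g => d.insert g (min 1 (sizes.getD g 0))) PySem.Dict.empty).items
      else
        let large := order.filter (fun g => small_threshold < sizes.getD g 0 && 1 < sizes.getD g 0)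
        let es := PySem.List.sorted (large.map (fun g => sizes.getD g 0 - 2)) (fun x => x) false
        let n : Int := (es.length : Int)
        let total_e := es.sum
        let RU := if total_e ≤ rem0 then
                    ((if es ≠ [] then PySem.List.pyGetD es (-1) 0 else 0), total_e)  -- es[-1], guarded nonempty
                  else pvFindLevel rem0 n es 0 0 0
        let leftover0 := rem0 - RU.2
        let extra1 := if rem0 < total_e then pvExtras sizes large leftover0 RU.1 PySem.Set.empty else PySem.Set.empty
        let leftover := if rem0 < total_e then 0 else leftover0
        let a1 := large.foldl (fun d g =>
            d.insert g (1 + min RU.1 (sizes.getD g 0 - 2) + (if PySem.Set.contains extra1 g then 1 else 0)))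
          PySem.Dict.empty
        if leftover = 0 then
          (keys.foldl (fun d g => d.insert g (a1.getD g (min 1 (sizes.getD g 0)))) PySem.Dict.empty).items
        else
          let full2 := PySem.Set.ofList (large.take (min leftover (large.length : Int)).toNat)
          let rem2 := leftover - (PySem.Set.len full2 : Int)
          let a2 := large.foldl (fun d g =>
              d.insert g (sizes.getD g 0 - 1 + (if PySem.Set.contains full2 g then 1 else 0)))
            PySem.Dict.empty
          if rem2 = 0 then
            (keys.foldl (fun d g => d.insert g (a2.getD g (min 1 (sizes.getD g 0)))) PySem.Dict.empty).items
          else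
            let others := order.filter (fun g => !a2.contains g && 1 < sizes.getD g 0)
            let t3 := pvPass3B sizes others others.length a2 rem2
            let t4 := if 0 < t3.2 then pvTopUp sizes others t3.1 t3.2 else t3
            (keys.foldl (fun d g => d.insert g (t4.1.getD g (min 1 (sizes.getD g 0)))) PySem.Dict.empty).items

-- ===== PRECONDITION & SPEC =====
def Spec_allocate_simple_by_group_size (groups : List (String × List Int)) (need : Int) (small_threshold : Int) (out : List (String × Int)) : Prop := out = allocate_simple_by_group_size_alt groups need small_threshold
instance (groups : List (String × List Int)) (need : Int) (small_threshold : Int) (out : List (String × Int)) : Decidable (Spec_allocate_simple_by_group_size groups need small_threshold out) := by unfold Spec_allocate_simple_by_group_size; infer_instance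

-- ===== CLAIM (what is proved, stated in full; the proofs are below) =====
def Claim_equal_allocate_simple_by_group_size : Prop := ∀ (groups : List (String × List Int)) (need : Int) (small_threshold : Int), Dom_allocate_simple_by_group_size groups need small_threshold → Spec_allocate_simple_by_group_size groups need small_threshold (allocate_simple_by_group_size groups need small_threshold)

-- ===== LEMMAS AND PROOFS =====

-- ---- generic helpers about Set / Dict folds ----

theorem pvSet_update_eq_self (s l : List String) (h : ∀ x ∈ l, x ∈ s) : PySem.Set.update s l = s := by
  induction l generalizing s with
  | nil => rfl
  | cons a t ih =>
      have ha : PySem.Set.add s a = s := by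
        simp [PySem.Set.add, PySem.Set.contains, h a (by simp)]
      show List.foldl PySem.Set.add (PySem.Set.add s a) t = s
      rw [ha]; exact ih s fun x hx => h x (List.mem_cons_of_mem _ hx)

-- value written depends only on the key: lookup after the fold
theorem pvGetD_foldl_insertF (f : String → Int) (l : List String)
    (d : PySem.Dict String Int) (k : String) (d0 : Int) :
    (l.foldl (fun d g => d.insert g (f g)) d).getD k d0 = if k ∈ l then f k else d.getD k d0 := by
  induction l generalizing d with
  | nil => simp
  | cons a t ih =>
      simp only [List.foldl_cons, ih, PySem.Dict.getD_insert, List.mem_cons]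
      by_cases hkt : k ∈ t <;> by_cases hka : k = a <;> simp [hkt, hka]

theorem pvKeys_foldl_insertF (f : String → Int) (l : List String)
    (d : PySem.Dict String Int) (h : ∀ x ∈ l, x ∈ d.keys) :
    (l.foldl (fun d g => d.insert g (f g)) d).keys = d.keys := by
  rw [PySem.Dict.keys_foldl_insert]; exact pvSet_update_eq_self _ _ h

theorem pvItems_foldl_insertF (f : String → Int) (l : List String) (h : l.Nodup) :
    (l.foldl (fun d g => d.insert g (f g)) PySem.Dict.empty).items = l.map (fun g => (g, f g)) := by
  simpa using PySem.Dict.items_foldl_insert_fresh (l := l) (k := fun a => a) (v := f)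
    (d := PySem.Dict.empty) (by simp) (by simpa using h)

theorem pvSizes_nonneg (groups : List (String × List Int)) (k : String) :
    0 ≤ (pvSizes groups).getD k 0 := by
  unfold pvSizes
  suffices h : ∀ (d : PySem.Dict String Int), (∀ x, 0 ≤ d.getD x 0) →
      ∀ x, 0 ≤ (groups.foldl (fun d p => d.insert p.1 ((p.2.length : Int))) d).getD x 0 by
    exact h PySem.Dict.empty (by simp) k
  induction groups with
  | nil => intro d hd x; simpa using hd x
  | cons p t ih =>
      intro d hd x
      refine ih _ (fun y => ?_) x
      rw [PySem.Dict.getD_insert]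
      split
      · positivity
      · exact hd y

theorem pvSizes_keys_nodup (groups : List (String × List Int)) : (pvSizes groups).keys.Nodup := by
  unfold pvSizes
  exact PySem.Dict.nodup_keys_foldl_insert_key groups Prod.fst _ PySem.Dict.empty (by simp)

theorem pvSum_min_one (S : String → Int) (l : List String) (h : ∀ g ∈ l, 0 ≤ S g) :
    (l.map (fun g => min 1 (S g))).sum = ((l.countP (fun g => decide (0 < S g)) : Nat) : Int) := by
  induction l with
  | nil => simp
  | cons a t ih =>
      have ha := h a (by simp)
      have ht := ih (fun g hg => h g (List.mem_cons_of_mem _ hg))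
      rw [List.map_cons, List.sum_cons, List.countP_cons, ht]
      by_cases h0 : 0 < S a <;> simp [h0] <;> omega


-- ---- pass-1 water level: arithmetic of the fill function fS ----

-- extra capacity of a large group below its pass-1 soft cap
def pvEx (sz : PySem.Dict String Int) (g : String) : Int := sz.getD g 0 - 2

-- units consumed by pass 1 once the water level is k
def pvFS (sz : PySem.Dict String Int) (large : List String) (k : Int) : Int :=
  (large.map (fun g => min k (pvEx sz g))).sum

theorem pvFS_mono (sz : PySem.Dict String Int) (large : List String) {k k' : Int} (h : k ≤ k') :
    pvFS sz large k ≤ pvFS sz large k' := by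
  unfold pvFS
  apply List.sum_le_sum
  intro g _
  exact min_le_min h le_rfl

theorem pvFS_succ (sz : PySem.Dict String Int) (large : List String) (k : Int) :
    pvFS sz large (k + 1) = pvFS sz large k + ((large.filter (fun g => decide (k < pvEx sz g))).length : Int) := by
  induction large with
  | nil => simp [pvFS]
  | cons a t ih =>
      simp only [pvFS, List.map_cons, List.sum_cons, List.filter_cons] at *
      by_cases h : k < pvEx sz a <;> simp [h] <;> push_cast <;> omega

theorem pvMin_eq_of_sum_eq (sz : PySem.Dict String Int) (large : List String) {k k' : Int}
    (hle : k ≤ k') (hsum : pvFS sz large k = pvFS sz large k') :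
    ∀ g ∈ large, min k (pvEx sz g) = min k' (pvEx sz g) := by
  induction large with
  | nil => simp
  | cons a t ih =>
      simp only [pvFS, List.map_cons, List.sum_cons] at hsum
      have h1 : min k (pvEx sz a) ≤ min k' (pvEx sz a) := min_le_min hle le_rfl
      have h2 : pvFS sz t k ≤ pvFS sz t k' := pvFS_mono sz t hle
      simp only [pvFS] at h2
      intro g hg
      rcases List.mem_cons.mp hg with rfl | hg'
      · omega
      · exact ih (by unfold pvFS; omega) g hg'

theorem pvFS_sat (sz : PySem.Dict String Int) (large : List String) {k : Int}
    (h : ∀ g ∈ large, pvEx sz g ≤ k) :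
    pvFS sz large k = (large.map (pvEx sz)).sum := by
  unfold pvFS
  congr 1
  exact List.map_congr_left (fun g hg => min_eq_right (h g hg))

-- ---- characterization of one round of A's pass-1 while loop ----

theorem pvRound1_char (sz : PySem.Dict String Int) :
    ∀ (l : List String) (alloc : PySem.Dict String Int) (remaining : Int) (p : Bool),
    l.Nodup → 0 < remaining → (∀ g ∈ l, g ∈ alloc.keys) →
    (pvRound1 sz l alloc remaining p).1.keys = alloc.keys ∧
    (∀ x, (pvRound1 sz l alloc remaining p).1.getD x 0 =
        alloc.getD x 0 + (if x ∈ (l.filter (fun g => decide (alloc.getD g 0 < max 0 (sz.getD g 0 - 1)))).take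
            (min remaining ((l.filter (fun g => decide (alloc.getD g 0 < max 0 (sz.getD g 0 - 1)))).length : Int)).toNat then 1 else 0)) ∧
    (pvRound1 sz l alloc remaining p).2.1 =
        remaining - ((l.filter (fun g => decide (alloc.getD g 0 < max 0 (sz.getD g 0 - 1)))).take
            (min remaining ((l.filter (fun g => decide (alloc.getD g 0 < max 0 (sz.getD g 0 - 1)))).length : Int)).toNat).length ∧
    (pvRound1 sz l alloc remaining p).2.2 =
        (p || !((l.filter (fun g => decide (alloc.getD g 0 < max 0 (sz.getD g 0 - 1)))).take
            (min remaining ((l.filter (fun g => decide (alloc.getD g 0 < max 0 (sz.getD g 0 - 1)))).length : Int)).toNat).isEmpty) := by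
  intro l
  induction l with
  | nil => intro alloc remaining p _ hr _; simp [pvRound1]
  | cons g rest ih =>
      intro alloc remaining p hnd hr hkeys
      obtain ⟨hg, hndr⟩ := List.nodup_cons.mp hnd
      by_cases he : alloc.getD g 0 < max 0 (sz.getD g 0 - 1)
      · -- eligible head
        by_cases hz : remaining - 1 = 0
        · -- break immediately
          have hrem1 : remaining = 1 := by omega
          subst_vars
          have hcont : alloc.contains g = true :=
            PySem.Dict.contains_iff_mem_keys alloc g |>.mpr (hkeys g (by simp))
          have hres : pvRound1 sz (g :: rest) alloc 1 p = (alloc.insert g (alloc.getD g 0 + 1), 0, true) := by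
            simp [pvRound1, he]
          have hEcons : (g :: rest).filter (fun h => decide (alloc.getD h 0 < max 0 (sz.getD h 0 - 1)))
              = g :: rest.filter (fun h => decide (alloc.getD h 0 < max 0 (sz.getD h 0 - 1))) := by
            rw [List.filter_cons, if_pos (by simpa using he)]
          have htake : ((g :: rest).filter (fun h => decide (alloc.getD h 0 < max 0 (sz.getD h 0 - 1)))).take
              (min 1 (((g :: rest).filter (fun h => decide (alloc.getD h 0 < max 0 (sz.getD h 0 - 1)))).length : Int)).toNat
              = [g] := by
            rw [hEcons]
            have h1 : (min (1:Int) (((rest.filter (fun h => decide (alloc.getD h 0 < max 0 (sz.getD h 0 - 1)))).length : Int) + 1)).toNat = 1 := by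
              have : (0:Int) ≤ ((rest.filter (fun h => decide (alloc.getD h 0 < max 0 (sz.getD h 0 - 1)))).length : Int) := by positivity
              omega
            simp only [List.length_cons]
            push_cast
            rw [h1, List.take_succ_cons, List.take_zero]
          rw [hres, htake]
          refine ⟨PySem.Dict.keys_insert_of_contains alloc _ hcont, ?_, by simp, by simp⟩
          intro x
          rw [PySem.Dict.getD_insert]
          by_cases hx : x = g <;> simp [hx]
        · -- continue with rest
          have hr' : 0 < remaining - 1 := by omega
          have hkeys' : ∀ h ∈ rest, h ∈ (alloc.insert g (alloc.getD g 0 + 1)).keys := by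
            intro h hh
            rw [PySem.Dict.mem_keys_insert]
            exact Or.inr (hkeys h (List.mem_cons_of_mem _ hh))
          have IH := ih (alloc.insert g (alloc.getD g 0 + 1)) (remaining - 1) true hndr hr' hkeys'
          -- the filter over rest is unchanged by the insert at g
          have hfilt : rest.filter (fun h => decide ((alloc.insert g (alloc.getD g 0 + 1)).getD h 0 < max 0 (sz.getD h 0 - 1)))
              = rest.filter (fun h => decide (alloc.getD h 0 < max 0 (sz.getD h 0 - 1))) := by
            apply List.filter_congr
            intro h hh
            have hne : h ≠ g := fun e => hg (e ▸ hh)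
            rw [PySem.Dict.getD_insert, if_neg hne]
          rw [hfilt] at IH
          set E' := rest.filter (fun h => decide (alloc.getD h 0 < max 0 (sz.getD h 0 - 1))) with hE'
          have hkeys2 : (alloc.insert g (alloc.getD g 0 + 1)).keys = alloc.keys :=
            PySem.Dict.keys_insert_of_contains alloc _ (PySem.Dict.contains_iff_mem_keys alloc g |>.mpr (hkeys g (by simp)))
          have hEcons : (g :: rest).filter (fun h => decide (alloc.getD h 0 < max 0 (sz.getD h 0 - 1))) = g :: E' := by
            rw [hE', List.filter_cons, if_pos (by simpa using he)]
          have htake : ((g :: rest).filter (fun h => decide (alloc.getD h 0 < max 0 (sz.getD h 0 - 1)))).take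
              (min remaining (((g :: rest).filter (fun h => decide (alloc.getD h 0 < max 0 (sz.getD h 0 - 1)))).length : Int)).toNat
              = g :: E'.take (min (remaining - 1) (E'.length : Int)).toNat := by
            rw [hEcons]
            have : (min remaining ((g :: E').length : Int)).toNat = (min (remaining - 1) (E'.length : Int)).toNat + 1 := by
              simp only [List.length_cons]
              push_cast
              omega
            rw [this, List.take_succ_cons]
          have hgE' : g ∉ E'.take (min (remaining - 1) (E'.length : Int)).toNat := by
            intro hmem
            exact hg (List.mem_of_mem_filter (List.mem_of_mem_take hmem))
          have hstep : pvRound1 sz (g :: rest) alloc remaining p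
              = pvRound1 sz rest (alloc.insert g (alloc.getD g 0 + 1)) (remaining - 1) true := by
            simp [pvRound1, he, hz]
          rw [hstep]
          refine ⟨?_, ?_, ?_, ?_⟩
          · rw [IH.1, hkeys2]
          · intro x
            rw [IH.2.1 x, htake]
            by_cases hx : x = g
            · subst hx
              simp [hgE']
            · rw [PySem.Dict.getD_insert, if_neg hx]
              simp [hx]
          · rw [IH.2.2.1, htake]
            simp only [List.length_cons]
            push_cast
            ring
          · rw [IH.2.2.2, htake]
            simp
      · -- ineligible head: skip
        have IH := ih alloc remaining p hndr hr (fun h hh => hkeys h (List.mem_cons_of_mem _ hh))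
        have hEcons : (g :: rest).filter (fun h => decide (alloc.getD h 0 < max 0 (sz.getD h 0 - 1)))
            = rest.filter (fun h => decide (alloc.getD h 0 < max 0 (sz.getD h 0 - 1))) := by
          rw [List.filter_cons, if_neg (by simpa using he)]
        simp only [pvRound1, if_neg he]
        rw [hEcons]
        exact IH


-- selected first-`L` large groups that get the remainder unit after the level is reached
def pvX (sz : PySem.Dict String Int) (large : List String) (rem0 R : Int) : List String :=
  (large.filter (fun g => decide (R < pvEx sz g))).take (rem0 - pvFS sz large R).toNat

theorem pvFS_zero (sz : PySem.Dict String Int) (large : List String)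
    (h2 : ∀ g ∈ large, 2 ≤ sz.getD g 0) : pvFS sz large 0 = 0 := by
  unfold pvFS
  rw [List.sum_eq_zero]
  intro x hx
  obtain ⟨g, hg, rfl⟩ := List.mem_map.mp hx
  have := h2 g hg
  unfold pvEx
  omega

theorem pvLoop1_char (sz : PySem.Dict String Int) (large : List String)
    (hnd : large.Nodup) (h2 : ∀ g ∈ large, 2 ≤ sz.getD g 0)
    (rem0 R : Int) (hR : 0 ≤ R)
    (hbr1 : pvFS sz large R ≤ rem0)
    (hbr2 : rem0 < pvFS sz large (R + 1) ∨ ∀ g ∈ large, pvEx sz g ≤ R) :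
    ∀ (n : Nat) (k : Int) (alloc : PySem.Dict String Int), (R - k).toNat ≤ n → 0 ≤ k → k ≤ R →
    (∀ g ∈ large, g ∈ alloc.keys) →
    (∀ g ∈ large, alloc.getD g 0 = 1 + min k (pvEx sz g)) →
    (pvLoop1 sz large alloc (rem0 - pvFS sz large k)).1.keys = alloc.keys ∧
    (pvLoop1 sz large alloc (rem0 - pvFS sz large k)).2
        = rem0 - pvFS sz large R - ((pvX sz large rem0 R).length : Int) ∧
    ∀ x, (pvLoop1 sz large alloc (rem0 - pvFS sz large k)).1.getD x 0 =
        if x ∈ large then 1 + min R (pvEx sz x) + (if x ∈ pvX sz large rem0 R then 1 else 0)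
        else alloc.getD x 0 := by
  intro n
  induction n using Nat.strong_induction_on with
  | _ n ihn =>
  intro k alloc hn h0 hkR hkeys hstate
  have hmono : pvFS sz large k ≤ pvFS sz large R := pvFS_mono sz large hkR
  by_cases hrem : 0 < rem0 - pvFS sz large k
  case neg =>
    -- remaining is 0 on entry: the loop exits at once; the level is already final
    have heq : pvFS sz large k = rem0 := by omega
    have hfkR : pvFS sz large k = pvFS sz large R := by omega
    have hpt := pvMin_eq_of_sum_eq sz large hkR hfkR
    have hX : pvX sz large rem0 R = [] := by
      unfold pvX
      have hz : (rem0 - pvFS sz large R).toNat = 0 := by omega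
      rw [hz, List.take_zero]
    rw [pvLoop1]
    simp only [dif_neg hrem]
    refine ⟨?_, ?_, ?_⟩
    · trivial
    · rw [hX]; simp only [List.length_nil, Nat.cast_zero]; omega
    intro x
    by_cases hx : x ∈ large
    · rw [if_pos hx, hX, hstate x hx, hpt x hx]
      simp
    · rw [if_neg hx]
  case pos =>
    obtain ⟨rkeys, rpt, rrem, rp⟩ :=
      pvRound1_char sz large alloc (rem0 - pvFS sz large k) false hnd hrem hkeys
    have hE : large.filter (fun g => decide (alloc.getD g 0 < max 0 (sz.getD g 0 - 1)))
        = large.filter (fun g => decide (k < pvEx sz g)) := by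
      apply List.filter_congr
      intro g hg
      rw [hstate g hg]
      have := h2 g hg
      simp only [decide_eq_decide]
      unfold pvEx
      omega
    rw [hE] at rpt rrem rp
    set E := large.filter (fun g => decide (k < pvEx sz g)) with hEdef
    have hlenE : (E.length : Int) = pvFS sz large (k + 1) - pvFS sz large k := by
      rw [pvFS_succ]; rw [hEdef]; ring
    set INC := E.take (min (rem0 - pvFS sz large k) (E.length : Int)).toNat with hINCdef
    have hmemE : ∀ g, g ∈ E ↔ g ∈ large ∧ k < pvEx sz g := by
      intro g; rw [hEdef, List.mem_filter]; simp
    have hnotlarge_of_INC : ∀ x, x ∉ large → x ∉ INC := by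
      intro x hx hmem
      exact hx ((hmemE x).mp (List.mem_of_mem_take hmem)).1
    rw [pvLoop1]
    simp only [dif_pos hrem]
    by_cases hempty : INC.isEmpty
    · -- no group below its soft cap: the loop stops; saturated level
      have hEnil : E = [] := by
        cases hEc : E with
        | nil => rfl
        | cons e0 t =>
            exfalso
            rw [hINCdef, hEc] at hempty
            have : (min (rem0 - pvFS sz large k) ((e0 :: t).length : Int)).toNat ≥ 1 := by
              simp only [List.length_cons]
              push_cast
              omega
            rcases Nat.exists_eq_add_of_le this with ⟨j, hj⟩
            rw [hj, Nat.add_comm, List.take_succ_cons] at hempty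
            simp at hempty
      have hsat : ∀ g ∈ large, pvEx sz g ≤ k := by
        intro g hg
        by_contra hlt
        have : g ∈ E := (hmemE g).mpr ⟨hg, by omega⟩
        rw [hEnil] at this
        simp at this
      have hfk : pvFS sz large k = (large.map (pvEx sz)).sum := pvFS_sat sz large hsat
      have hSatR : ∀ g ∈ large, pvEx sz g ≤ R := by
        rcases hbr2 with hlev | hsatR
        · exfalso
          have : pvFS sz large (R + 1) = (large.map (pvEx sz)).sum :=
            pvFS_sat sz large (fun g hg => le_trans (hsat g hg) (by omega))
          omega
        · exact hsatR
      have hfR : pvFS sz large R = (large.map (pvEx sz)).sum := pvFS_sat sz large hSatR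
      have hXnil : pvX sz large rem0 R = [] := by
        unfold pvX
        have : large.filter (fun g => decide (R < pvEx sz g)) = [] := by
          rw [List.filter_eq_nil_iff]
          intro g hg
          have := hSatR g hg
          simp
          omega
        rw [this, List.take_nil]
      have hp' : (pvRound1 sz large alloc (rem0 - pvFS sz large k) false).2.2 = false := by
        rw [rp, hempty]
        rfl
      rw [dif_neg (by rw [hp']; simp)]
      refine ⟨rkeys, ?_, ?_⟩
      · rw [rrem, hXnil]
        rw [hINCdef, hEnil]
        simp
        omega
      · intro x
        rw [rpt x]
        by_cases hx : x ∈ large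
        · rw [if_pos hx, hXnil]
          rw [hstate x hx]
          have h1 : min k (pvEx sz x) = pvEx sz x := min_eq_right (hsat x hx)
          have h2' : min R (pvEx sz x) = pvEx sz x := min_eq_right (hSatR x hx)
          have hxINC : x ∉ INC := by
            rw [hINCdef, hEnil]
            simp
          simp [hxINC, h1, h2']
        · rw [if_neg hx]
          simp [hnotlarge_of_INC x hx]
    · -- some progress was made
      have hp' : (pvRound1 sz large alloc (rem0 - pvFS sz large k) false).2.2 = true := by
        rw [rp]
        simp only [Bool.not_eq_true] at hempty
        simp [hempty]
      rw [dif_pos hp']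
      by_cases hfull : (E.length : Int) < rem0 - pvFS sz large k
      · -- a full round: every group below its soft cap got one; recurse at level k+1
        have hINCE : INC = E := by
          rw [hINCdef]
          have : (min (rem0 - pvFS sz large k) (E.length : Int)).toNat = E.length := by omega
          rw [this, List.take_length]
        have hkltR : k < R := by
          rcases lt_or_eq_of_le hkR with h | h
          · exact h
          · exfalso
            subst h
            rcases hbr2 with hlev | hsatR
            · omega
            · have : E = [] := by
                rw [hEdef, List.filter_eq_nil_iff]
                intro g hg
                have := hsatR g hg
                simp
                omega
              rw [hINCE, this] at hempty
              simp at hempty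
        have hrem' : rem0 - pvFS sz large k - (INC.length : Int) = rem0 - pvFS sz large (k + 1) := by
          rw [hINCE]
          omega
        have hstate' : ∀ g ∈ large, (pvRound1 sz large alloc (rem0 - pvFS sz large k) false).1.getD g 0
            = 1 + min (k + 1) (pvEx sz g) := by
          intro g hg
          rw [rpt g, hstate g hg, hINCE]
          by_cases hgE : g ∈ E
          · have := (hmemE g).mp hgE
            simp [hgE]
            omega
          · have : ¬ k < pvEx sz g := fun hlt => hgE ((hmemE g).mpr ⟨hg, hlt⟩)
            simp [hgE]
            omega
        have hkeys' : ∀ g ∈ large, g ∈ (pvRound1 sz large alloc (rem0 - pvFS sz large k) false).1.keys := by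
          intro g hg
          rw [rkeys]
          exact hkeys g hg
        have IH := ihn (R - (k + 1)).toNat (by omega) (k + 1)
          (pvRound1 sz large alloc (rem0 - pvFS sz large k) false).1
          le_rfl (by omega) (by omega) hkeys' hstate'
        rw [rrem, hrem']
        refine ⟨by rw [IH.1, rkeys], IH.2.1, ?_⟩
        intro x
        rw [IH.2.2 x]
        by_cases hx : x ∈ large
        · rw [if_pos hx, if_pos hx]
        · rw [if_neg hx, if_neg hx, rpt x]
          simp [hnotlarge_of_INC x hx]
      · -- a partial round: remaining ran out inside this round; the loop then exits
        have hremle : rem0 - pvFS sz large k ≤ (E.length : Int) := by omega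
        have hINCtake : INC = E.take (rem0 - pvFS sz large k).toNat := by
          rw [hINCdef]
          congr 1
          omega
        have hlenINC : (INC.length : Int) = rem0 - pvFS sz large k := by
          rw [hINCtake, List.length_take]
          push_cast
          omega
        have hrem0' : rem0 - pvFS sz large k - (INC.length : Int) = 0 := by omega
        rw [rrem, hrem0']
        rw [pvLoop1]
        rw [dif_neg (by omega)]
        rcases lt_or_eq_of_le hkR with hklt | hkeq
        · -- k < R: the sums collapse; the level R is reached with no leftover
          have h1 : rem0 ≤ pvFS sz large (k + 1) := by omega
          have h2' : pvFS sz large (k + 1) ≤ pvFS sz large R := pvFS_mono sz large (by omega)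
          have hfeq : pvFS sz large (k + 1) = pvFS sz large R := by omega
          have hrem0eq : rem0 = pvFS sz large R := by omega
          have hpt := pvMin_eq_of_sum_eq sz large (show k + 1 ≤ R by omega) hfeq
          have hINCE : INC = E := by
            rw [hINCtake]
            have : (rem0 - pvFS sz large k).toNat = E.length := by omega
            rw [this, List.take_length]
          have hXnil : pvX sz large rem0 R = [] := by
            unfold pvX
            have : (rem0 - pvFS sz large R).toNat = 0 := by omega
            rw [this, List.take_zero]
          refine ⟨rkeys, by rw [hXnil]; simp; omega, ?_⟩
          intro x
          rw [rpt x]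
          by_cases hx : x ∈ large
          · rw [if_pos hx, hXnil, hstate x hx, ← hpt x hx, hINCE]
            by_cases hgE : x ∈ E
            · have := (hmemE x).mp hgE
              simp [hgE]
              omega
            · have : ¬ k < pvEx sz x := fun hlt => hgE ((hmemE x).mpr ⟨hx, hlt⟩)
              simp [hgE]
              omega
          · rw [if_neg hx]
            simp [hnotlarge_of_INC x hx]
        · -- k = R: the leftover goes to the first groups still below the cap
          subst hkeq
          have hXINC : pvX sz large rem0 k = INC := by
            unfold pvX
            rw [hINCtake, hEdef]
          refine ⟨rkeys, by rw [hXINC]; omega, ?_⟩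
          intro x
          rw [rpt x]
          by_cases hx : x ∈ large
          · rw [if_pos hx, hXINC, hstate x hx]
          · rw [if_neg hx]
            simp [hnotlarge_of_INC x hx]

-- ---- pass 2: one last unit per large group, in priority order ----

theorem pvFill_ones (sz : PySem.Dict String Int) :
    ∀ (l : List String) (alloc : PySem.Dict String Int) (rem : Int), l.Nodup → 0 < rem →
    (∀ g ∈ l, alloc.getD g 0 = sz.getD g 0 - 1 ∧ 2 ≤ sz.getD g 0 ∧ g ∈ alloc.keys) →
    (pvFill sz l alloc rem).1.keys = alloc.keys ∧
    (pvFill sz l alloc rem).2 = rem - min rem (l.length : Int) ∧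
    ∀ x, (pvFill sz l alloc rem).1.getD x 0 =
        alloc.getD x 0 + (if x ∈ l.take (min rem (l.length : Int)).toNat then 1 else 0) := by
  intro l
  induction l with
  | nil =>
      intro alloc rem _ hrem _
      simp [pvFill]
      omega
  | cons g rest ih =>
      intro alloc rem hnd hrem hl
      obtain ⟨hg, hndr⟩ := List.nodup_cons.mp hnd
      obtain ⟨ha, h2, hk⟩ := hl g (by simp)
      have hcond : alloc.getD g 0 < sz.getD g 0 ∧ 0 < rem := ⟨by omega, hrem⟩
      have htake1 : min (sz.getD g 0 - alloc.getD g 0) rem = 1 := by omega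
      have hcont : alloc.contains g = true := PySem.Dict.contains_iff_mem_keys alloc g |>.mpr hk
      have hkeys2 : (alloc.insert g (alloc.getD g 0 + 1)).keys = alloc.keys :=
        PySem.Dict.keys_insert_of_contains alloc _ hcont
      by_cases hz : rem - 1 = 0
      · have hrem1 : rem = 1 := by omega
        subst hrem1
        have hres : pvFill sz (g :: rest) alloc 1 = (alloc.insert g (alloc.getD g 0 + 1), 0) := by
          simp [pvFill, hcond, htake1]
        rw [hres]
        have hmin : (min (1:Int) ((g :: rest).length : Int)).toNat = 1 := by
          simp only [List.length_cons]; push_cast; omega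
        refine ⟨hkeys2, by simp only [List.length_cons]; push_cast; omega, ?_⟩
        intro x
        rw [hmin, List.take_succ_cons, List.take_zero, PySem.Dict.getD_insert]
        by_cases hx : x = g <;> simp [hx]
      · have hres : pvFill sz (g :: rest) alloc rem
            = pvFill sz rest (alloc.insert g (alloc.getD g 0 + 1)) (rem - 1) := by
          simp [pvFill, hcond, htake1, hz]
        have hl' : ∀ h ∈ rest, (alloc.insert g (alloc.getD g 0 + 1)).getD h 0 = sz.getD h 0 - 1
            ∧ 2 ≤ sz.getD h 0 ∧ h ∈ (alloc.insert g (alloc.getD g 0 + 1)).keys := by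
          intro h hh
          have hne : h ≠ g := fun e => hg (e ▸ hh)
          obtain ⟨h1', h2', h3'⟩ := hl h (List.mem_cons_of_mem _ hh)
          exact ⟨by rw [PySem.Dict.getD_insert, if_neg hne]; exact h1', h2',
            by rw [PySem.Dict.mem_keys_insert]; exact Or.inr h3'⟩
        have IH := ih (alloc.insert g (alloc.getD g 0 + 1)) (rem - 1) hndr (by omega) hl'
        rw [hres]
        have hmin : (min rem ((g :: rest).length : Int)).toNat
            = (min (rem - 1) ((rest.length : Nat) : Int)).toNat + 1 := by
          simp only [List.length_cons]; push_cast; omega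
        refine ⟨by rw [IH.1, hkeys2], ?_, ?_⟩
        · rw [IH.2.1]; simp only [List.length_cons]; push_cast; omega
        · intro x
          rw [IH.2.2 x, hmin, List.take_succ_cons, PySem.Dict.getD_insert]
          have hgt : g ∉ rest.take (min (rem - 1) ((rest.length : Nat) : Int)).toNat :=
            fun hm => hg (List.mem_of_mem_take hm)
          by_cases hx : x = g
          · subst hx; simp [hgt]
          · simp [hx]

-- pvFill only looks at elements that still have room: skipped elements can be filtered away
theorem pvFill_filter (sz : PySem.Dict String Int) (P : String → Bool) :
    ∀ (l : List String) (alloc : PySem.Dict String Int) (rem : Int),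
    (∀ g ∈ l, P g = false → ¬(alloc.getD g 0 < sz.getD g 0)) →
    pvFill sz l alloc rem = pvFill sz (l.filter P) alloc rem := by
  intro l
  induction l with
  | nil => intro alloc rem _; rfl
  | cons g rest ih =>
      intro alloc rem h
      by_cases hP : P g
      · rw [List.filter_cons, if_pos (by simp [hP])]
        show pvFill sz (g :: rest) alloc rem = pvFill sz (g :: rest.filter P) alloc rem
        by_cases hcond : alloc.getD g 0 < sz.getD g 0 ∧ 0 < rem
        · by_cases hz : rem - min (sz.getD g 0 - alloc.getD g 0) rem = 0
          · simp [pvFill, hcond, hz]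
          · simp only [pvFill, if_pos hcond, if_neg hz]
            apply ih
            intro h' hh' hPf
            have hne : h' ≠ g := fun e => by rw [e] at hPf; rw [hPf] at hP; exact Bool.false_ne_true hP
            rw [PySem.Dict.getD_insert, if_neg hne]
            exact h h' (List.mem_cons_of_mem _ hh') hPf
        · simp only [pvFill, if_neg hcond]
          exact ih alloc rem (fun h' hh' => h h' (List.mem_cons_of_mem _ hh'))
      · have hroom := h g (by simp) (by simpa using hP)
        rw [List.filter_cons, if_neg (by simp [hP])]
        simp only [pvFill, if_neg (by tauto : ¬(alloc.getD g 0 < sz.getD g 0 ∧ 0 < rem))]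
        exact ih alloc rem (fun h' hh' => h h' (List.mem_cons_of_mem _ hh'))


-- ---- pass 3: A's loop and B's loop move in lockstep ----

theorem pvPass3_pair (sz : PySem.Dict String Int) (N : Nat) :
    ∀ (l : List String) (allocA a3 : PySem.Dict String Int) (rem : Int), l.Nodup → 0 < rem →
    (∀ g ∈ l, allocA.getD g 0 = 1 ∧ 2 ≤ sz.getD g 0 ∧ g ∈ allocA.keys) →
    (∀ x, allocA.getD x 0 = a3.getD x (min 1 (sz.getD x 0))) →
    (pvPass3 sz l N allocA rem).2 = (pvPass3B sz l N a3 rem).2 ∧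
    (∀ x, (pvPass3 sz l N allocA rem).1.getD x 0
        = (pvPass3B sz l N a3 rem).1.getD x (min 1 (sz.getD x 0))) ∧
    (pvPass3 sz l N allocA rem).1.keys = allocA.keys ∧
    0 ≤ (pvPass3 sz l N allocA rem).2 ∧ (pvPass3 sz l N allocA rem).2 ≤ rem ∧
    (∀ x, x ∉ l → (pvPass3 sz l N allocA rem).1.getD x 0 = allocA.getD x 0) ∧
    (0 < (pvPass3 sz l N allocA rem).2 → ∀ g ∈ l,
        (pvPass3 sz l N allocA rem).1.getD g 0 = (if 1 < N then sz.getD g 0 - 1 else sz.getD g 0)) := by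
  intro l
  induction l with
  | nil =>
      intro allocA a3 rem _ hrem _ hrel
      refine ⟨?_, ?_, ?_, ?_, ?_, ?_, ?_⟩ <;> simp only [pvPass3, pvPass3B]
      · exact hrel
      · omega
      · omega
      · exact fun _ _ => trivial
      · simp
  | cons g rest ih =>
      intro allocA a3 rem hnd hrem hl hrel
      obtain ⟨hg, hndr⟩ := List.nodup_cons.mp hnd
      obtain ⟨ha1, h2, hk⟩ := hl g (by simp)
      have hcont : allocA.contains g = true := PySem.Dict.contains_iff_mem_keys allocA g |>.mpr hk
      have hcond : allocA.getD g 0 < sz.getD g 0 ∧ 0 < rem := ⟨by omega, hrem⟩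
      -- A's target equals B's room
      have hsc : (if 1 < N then max 1 (min (sz.getD g 0 - 1) (sz.getD g 0)) else sz.getD g 0)
          = (if 1 < N then sz.getD g 0 - 1 else sz.getD g 0) := by
        by_cases hN : 1 < N <;> simp [hN] <;> omega
      set target := if 1 < N then sz.getD g 0 - 1 else sz.getD g 0 with htarget
      have htc : min (if 1 < N then max 1 (min (sz.getD g 0 - 1) (sz.getD g 0)) else sz.getD g 0) (sz.getD g 0) = target := by
        rw [hsc, htarget]
        by_cases hN : 1 < N <;> simp [hN] <;> omega
      have hrelmaint : ∀ (v : Int), ∀ x, (allocA.insert g v).getD x 0 = (a3.insert g v).getD x (min 1 (sz.getD x 0)) := by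
        intro v x
        rw [PySem.Dict.getD_insert, PySem.Dict.getD_insert]
        by_cases hx : x = g
        · simp [hx]
        · simp only [if_neg hx]
          exact hrel x
      have hstep : ∀ (v : Int), ∀ h' ∈ rest, (allocA.insert g v).getD h' 0 = 1
          ∧ 2 ≤ sz.getD h' 0 ∧ h' ∈ (allocA.insert g v).keys := by
        intro v h' hh'
        have hne : h' ≠ g := fun e => hg (e ▸ hh')
        obtain ⟨q1, q2, q3⟩ := hl h' (List.mem_cons_of_mem _ hh')
        exact ⟨by rw [PySem.Dict.getD_insert, if_neg hne]; exact q1, q2,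
          by rw [PySem.Dict.mem_keys_insert]; exact Or.inr q3⟩
      have hkeys2 : ∀ (v : Int), (allocA.insert g v).keys = allocA.keys :=
        fun v => PySem.Dict.keys_insert_of_contains allocA _ hcont
      by_cases h1t : (1 : Int) < target
      · -- both write 1 + take with the same take
        have htake : min (target - 1) rem = min (target - allocA.getD g 0) rem := by rw [ha1]
        set take := min (target - 1) rem with htakedef
        have hA : pvPass3 sz (g :: rest) N allocA rem
            = (if rem - take = 0 then ((allocA.insert g (1 + take)), rem - take)
               else pvPass3 sz rest N (allocA.insert g (1 + take)) (rem - take)) := by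
          simp only [pvPass3, if_pos hcond, htc]
          rw [if_pos (show allocA.getD g 0 < target by omega), ha1, ← htakedef]
        have hB : pvPass3B sz (g :: rest) N a3 rem
            = (if rem - take = 0 then ((a3.insert g (1 + take)), rem - take)
               else pvPass3B sz rest N (a3.insert g (1 + take)) (rem - take)) := by
          simp only [pvPass3B]
          rw [show (if 1 < N then sz.getD g 0 - 1 else sz.getD g 0) = target from rfl]
        by_cases hz : rem - take = 0
        · rw [hA, hB, if_pos hz, if_pos hz]
          refine ⟨rfl, hrelmaint _, hkeys2 _, by omega, by omega, ?_, by intro h'; omega⟩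
          intro x hx
          have hxg : ¬ x = g := by intro e; subst e; exact hx (by simp)
          rw [PySem.Dict.getD_insert, if_neg hxg]
        · rw [hA, hB, if_neg hz, if_neg hz]
          have IH := ih (allocA.insert g (1 + take)) (a3.insert g (1 + take)) (rem - take) hndr
            (by omega) (hstep _) (hrelmaint _)
          obtain ⟨i1, i2, i3, i4, i5, i6, i7⟩ := IH
          refine ⟨i1, i2, by rw [i3, hkeys2], i4, by omega, ?_, ?_⟩
          · intro x hx
            have hxg : ¬ x = g := by intro e; subst e; exact hx (by simp)
            rw [i6 x (fun hm => hx (List.mem_cons_of_mem _ hm)),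
              PySem.Dict.getD_insert, if_neg hxg]
          · intro hpos h' hh'
            rcases List.mem_cons.mp hh' with rfl | hh''
            · rw [i6 h' hg, PySem.Dict.getD_insert, if_pos rfl]
              have : take < rem := by omega
              have : take = target - 1 := by omega
              omega
            · exact i7 hpos h' hh''
      · -- cap = 2 and several others: A skips, B writes the unchanged value 1
        have hN : 1 < N := by
          by_contra hN'
          rw [htarget, if_neg hN'] at h1t
          omega
        have hcap2 : sz.getD g 0 = 2 := by
          rw [htarget, if_pos hN] at h1t
          omega
        have htake0 : min ((if 1 < N then sz.getD g 0 - 1 else sz.getD g 0) - 1) rem = 0 := by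
          rw [if_pos hN, hcap2]
          omega
        have hA : pvPass3 sz (g :: rest) N allocA rem = pvPass3 sz rest N allocA rem := by
          simp only [pvPass3, if_pos hcond, htc]
          rw [if_neg (show ¬ allocA.getD g 0 < target by omega)]
        have hB : pvPass3B sz (g :: rest) N a3 rem = pvPass3B sz rest N (a3.insert g 1) rem := by
          simp only [pvPass3B, htake0]
          rw [if_neg (by omega), show (1:Int) + 0 = 1 by norm_num, show rem - 0 = rem by ring]
        have hrel' : ∀ x, allocA.getD x 0 = (a3.insert g 1).getD x (min 1 (sz.getD x 0)) := by
          intro x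
          rw [PySem.Dict.getD_insert]
          by_cases hx : x = g
          · rw [if_pos hx, hx, ha1]
          · rw [if_neg hx]; exact hrel x
        have IH := ih allocA (a3.insert g 1) rem hndr hrem
          (fun h' hh' => hl h' (List.mem_cons_of_mem _ hh')) hrel'
        obtain ⟨i1, i2, i3, i4, i5, i6, i7⟩ := IH
        rw [hA, hB]
        refine ⟨i1, i2, i3, i4, i5, ?_, ?_⟩
        · intro x hx
          exact i6 x (fun hm => hx (List.mem_cons_of_mem _ hm))
        · intro hpos h' hh'
          rcases List.mem_cons.mp hh' with rfl | hh''
          · rw [i6 h' hg, ha1, if_pos hN, hcap2]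
            omega
          · exact i7 hpos h' hh''

-- B's top-up is the identity once rem = 0
theorem pvTopUp_zero (sz : PySem.Dict String Int) :
    ∀ (l : List String) (a3 : PySem.Dict String Int) (rem : Int), rem ≤ 0 →
    pvTopUp sz l a3 rem = (a3, rem) := by
  intro l
  induction l with
  | nil => intro a3 rem _; rfl
  | cons g rest ih =>
      intro a3 rem hrem
      simp only [pvTopUp, if_neg (by omega : ¬(a3.getD g 1 < sz.getD g 0 ∧ 0 < rem))]
      exact ih a3 rem hrem

-- A's final fill over the open groups and B's top-up agree
theorem pvTopUp_pair (sz : PySem.Dict String Int) :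
    ∀ (l : List String) (allocA a3 : PySem.Dict String Int) (rem : Int), l.Nodup →
    (∀ g ∈ l, (allocA.getD g 0 = sz.getD g 0 - 1 ∨ allocA.getD g 0 = sz.getD g 0)
        ∧ 2 ≤ sz.getD g 0 ∧ g ∈ allocA.keys) →
    (∀ x, allocA.getD x 0 = a3.getD x (min 1 (sz.getD x 0))) →
    (∀ x, (pvFill sz l allocA rem).1.getD x 0 = (pvTopUp sz l a3 rem).1.getD x (min 1 (sz.getD x 0))) ∧
    (pvFill sz l allocA rem).1.keys = allocA.keys ∧
    (pvFill sz l allocA rem).2 = (pvTopUp sz l a3 rem).2 := by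
  intro l
  induction l with
  | nil => intro allocA a3 rem _ _ hrel; exact ⟨hrel, rfl, rfl⟩
  | cons g rest ih =>
      intro allocA a3 rem hnd hl hrel
      obtain ⟨hg, hndr⟩ := List.nodup_cons.mp hnd
      obtain ⟨hval, h2, hk⟩ := hl g (by simp)
      have hcont : allocA.contains g = true := PySem.Dict.contains_iff_mem_keys allocA g |>.mpr hk
      have hmin1 : min (1:Int) (sz.getD g 0) = 1 := by omega
      have ha3g : a3.getD g 1 = allocA.getD g 0 := by
        have := hrel g
        rw [hmin1] at this
        omega
      have hstep : ∀ (v : Int), ∀ h' ∈ rest, ((allocA.insert g v).getD h' 0 = sz.getD h' 0 - 1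
          ∨ (allocA.insert g v).getD h' 0 = sz.getD h' 0) ∧ 2 ≤ sz.getD h' 0
          ∧ h' ∈ (allocA.insert g v).keys := by
        intro v h' hh'
        have hne : h' ≠ g := fun e => hg (e ▸ hh')
        obtain ⟨q1, q2, q3⟩ := hl h' (List.mem_cons_of_mem _ hh')
        exact ⟨by rw [PySem.Dict.getD_insert, if_neg hne]; exact q1, q2,
          by rw [PySem.Dict.mem_keys_insert]; exact Or.inr q3⟩
      have hkeys2 : ∀ (v : Int), (allocA.insert g v).keys = allocA.keys :=
        fun v => PySem.Dict.keys_insert_of_contains allocA _ hcont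
      have hrelmaint : ∀ (v : Int), ∀ x, (allocA.insert g v).getD x 0 = (a3.insert g v).getD x (min 1 (sz.getD x 0)) := by
        intro v x
        rw [PySem.Dict.getD_insert, PySem.Dict.getD_insert]
        by_cases hx : x = g
        · simp [hx]
        · simp only [if_neg hx]
          exact hrel x
      by_cases hroom : allocA.getD g 0 < sz.getD g 0 ∧ 0 < rem
      · -- allocA at cap-1, both give one unit
        have hval1 : allocA.getD g 0 = sz.getD g 0 - 1 := by rcases hval with h | h <;> omega
        have htake1 : min (sz.getD g 0 - allocA.getD g 0) rem = 1 := by omega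
        have hBcond : a3.getD g 1 < sz.getD g 0 ∧ 0 < rem := by rw [ha3g]; exact hroom
        have hvalins : allocA.getD g 0 + 1 = sz.getD g 0 := by omega
        have hB : pvTopUp sz (g :: rest) a3 rem = pvTopUp sz rest (a3.insert g (sz.getD g 0)) (rem - 1) := by
          simp only [pvTopUp, ha3g, hvalins]
          rw [if_pos hroom]
        by_cases hz : rem - 1 = 0
        · have hA : pvFill sz (g :: rest) allocA rem = (allocA.insert g (sz.getD g 0), 0) := by
            simp only [pvFill, if_pos hroom, htake1]
            rw [if_pos hz, hz, hvalins]
          rw [hA, hB, pvTopUp_zero sz rest _ (rem - 1) (by omega)]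
          exact ⟨hrelmaint (sz.getD g 0), hkeys2 _, by omega⟩
        · have hA : pvFill sz (g :: rest) allocA rem
              = pvFill sz rest (allocA.insert g (sz.getD g 0)) (rem - 1) := by
            simp only [pvFill, if_pos hroom, htake1, hvalins, if_neg hz]
          rw [hA, hB]
          have IH := ih (allocA.insert g (sz.getD g 0)) (a3.insert g (sz.getD g 0)) (rem - 1) hndr
            (hstep _) (hrelmaint _)
          exact ⟨IH.1, by rw [IH.2.1, hkeys2], IH.2.2⟩
      · -- no room or no budget: both skip
        have hBcond : ¬(a3.getD g 1 < sz.getD g 0 ∧ 0 < rem) := by rw [ha3g]; exact hroom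
        have hA : pvFill sz (g :: rest) allocA rem = pvFill sz rest allocA rem := by
          simp only [pvFill, if_neg hroom]
        have hB : pvTopUp sz (g :: rest) a3 rem = pvTopUp sz rest a3 rem := by
          simp only [pvTopUp, if_neg hBcond]
        rw [hA, hB]
        exact ih allocA a3 rem hndr (fun h' hh' => hl h' (List.mem_cons_of_mem _ hh')) hrel


-- ---- B's water-level search: specification ----

-- interpolation of the fill sum between two consecutive thresholds
theorem pvInterp (done t : List Int) (prev c : Int)
    (hd : ∀ x ∈ done, x ≤ prev) (hpc : prev ≤ c) (ht : ∀ x ∈ t, c ≤ x) :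
    (((done ++ t).map (fun x => min c x)).sum : Int)
      = ((done ++ t).map (fun x => min prev x)).sum + (t.length : Int) * (c - prev) := by
  rw [List.map_append, List.sum_append, List.map_append, List.sum_append]
  have h1 : (done.map (fun x => min c x)) = done.map (fun x => min prev x) := by
    apply List.map_congr_left
    intro x hx
    rw [min_eq_right (le_trans (hd x hx) hpc), min_eq_right (hd x hx)]
  have h2 : (t.map (fun x => min c x)) = t.map (fun _ => c) := by
    apply List.map_congr_left
    intro x hx
    rw [min_eq_left (ht x hx)]
  have h3 : (t.map (fun x => min prev x)) = t.map (fun _ => prev) := by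
    apply List.map_congr_left
    intro x hx
    rw [min_eq_left (le_trans hpc (ht x hx))]
  rw [h1, h2, h3, PySem.List.sum_map_const_int, PySem.List.sum_map_const_int]
  ring

theorem pvFindLevel_spec (rem : Int) (es : List Int) (hrem : rem < es.sum) (hrem0 : 0 ≤ rem) :
    ∀ (t done : List Int) (prev : Int), es = done ++ t →
    (∀ x ∈ done, x ≤ prev) → (∀ x ∈ t, prev ≤ x) → t.Pairwise (· ≤ ·) → 0 ≤ prev →
    (es.map (fun x => min prev x)).sum ≤ rem →
    0 ≤ (pvFindLevel rem (es.length : Int) t ((done.length : Nat) : Int)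
          ((es.map (fun x => min prev x)).sum) prev).1 ∧
    (es.map (fun x => min (pvFindLevel rem (es.length : Int) t ((done.length : Nat) : Int)
          ((es.map (fun x => min prev x)).sum) prev).1 x)).sum ≤ rem ∧
    rem < (es.map (fun x => min ((pvFindLevel rem (es.length : Int) t ((done.length : Nat) : Int)
          ((es.map (fun x => min prev x)).sum) prev).1 + 1) x)).sum ∧
    (pvFindLevel rem (es.length : Int) t ((done.length : Nat) : Int)
          ((es.map (fun x => min prev x)).sum) prev).2
      = (es.map (fun x => min (pvFindLevel rem (es.length : Int) t ((done.length : Nat) : Int)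
          ((es.map (fun x => min prev x)).sum) prev).1 x)).sum := by
  intro t
  induction t with
  | nil =>
      intro done prev heq hd ht hp hprev hacc
      exfalso
      have hdone : es = done := by simpa using heq
      subst hdone
      have hmap : es.map (fun x => min prev x) = es.map (fun x => x) :=
        List.map_congr_left (fun x hx => min_eq_right (hd x hx))
      rw [hmap, List.map_id'] at hacc
      omega
  | cons e t' ih =>
      intro done prev heq hd ht hp hprev hacc
      have hpe : prev ≤ e := ht e (by simp)
      have hte : ∀ x ∈ e :: t', e ≤ x := by
        intro x hx
        rcases List.mem_cons.mp hx with rfl | hx'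
        · exact le_rfl
        · exact (List.pairwise_cons.mp hp).1 x hx'
      have hmlen : ((es.length : Int) - ((done.length : Nat) : Int)) = ((e :: t').length : Int) := by
        rw [heq]
        simp only [List.length_append, List.length_cons]
        push_cast
        ring
      have hmpos : 0 < (es.length : Int) - ((done.length : Nat) : Int) := by
        rw [hmlen]
        simp only [List.length_cons]
        push_cast
        omega
      have hinterp : ∀ c : Int, prev ≤ c → (∀ x ∈ e :: t', c ≤ x) →
          (es.map (fun x => min c x)).sum
            = (es.map (fun x => min prev x)).sum + ((es.length : Int) - ((done.length : Nat) : Int)) * (c - prev) := by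
        intro c hc1 hc2
        rw [hmlen, heq, pvInterp done (e :: t') prev c hd hc1 hc2]
      by_cases hbreak : rem < (es.map (fun x => min prev x)).sum + ((es.length : Int) - ((done.length : Nat) : Int)) * (e - prev)
      · have hres : pvFindLevel rem (es.length : Int) (e :: t') ((done.length : Nat) : Int)
            ((es.map (fun x => min prev x)).sum) prev
            = (prev + PySem.Int.floordiv (rem - (es.map (fun x => min prev x)).sum) ((es.length : Int) - ((done.length : Nat) : Int)),
               (es.map (fun x => min prev x)).sum + ((es.length : Int) - ((done.length : Nat) : Int))
                 * ((prev + PySem.Int.floordiv (rem - (es.map (fun x => min prev x)).sum) ((es.length : Int) - ((done.length : Nat) : Int))) - prev)) := by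
          rw [pvFindLevel]
          simp only [if_pos hbreak]
        rw [hres]
        set m : Int := (es.length : Int) - ((done.length : Nat) : Int) with hmdef
        set acc : Int := (es.map (fun x => min prev x)).sum with haccdef
        set q : Int := PySem.Int.floordiv (rem - acc) m with hqdef
        have hdiv := PySem.Int.floordiv_mul_add_mod (rem - acc) m
        have hmod0 := PySem.Int.mod_nonneg (rem - acc) hmpos
        have hmodlt := PySem.Int.mod_lt (rem - acc) hmpos
        rw [← hqdef] at hdiv
        have hqnn : 0 ≤ q := by nlinarith
        have hqlt : q < e - prev := by nlinarith
        have hint1 : (es.map (fun x => min (prev + q) x)).sum = acc + m * (prev + q - prev) :=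
          hinterp (prev + q) (by omega) (fun x hx => le_trans (by omega) (hte x hx))
        have hint2 : (es.map (fun x => min (prev + q + 1) x)).sum = acc + m * (prev + q + 1 - prev) :=
          hinterp (prev + q + 1) (by omega) (fun x hx => le_trans (by omega) (hte x hx))
        refine ⟨by omega, ?_, ?_, ?_⟩
        · simp only
          rw [hint1]
          nlinarith
        · simp only
          rw [hint2]
          nlinarith
        · simp only
          rw [hint1]
      · have hres : pvFindLevel rem (es.length : Int) (e :: t') ((done.length : Nat) : Int)
            ((es.map (fun x => min prev x)).sum) prev
            = pvFindLevel rem (es.length : Int) t' (((done.length : Nat) : Int) + 1)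
               ((es.map (fun x => min prev x)).sum + ((es.length : Int) - ((done.length : Nat) : Int)) * (e - prev)) e := by
          rw [pvFindLevel]
          simp only [if_neg hbreak]
        have hstep : (es.map (fun x => min prev x)).sum + ((es.length : Int) - ((done.length : Nat) : Int)) * (e - prev)
            = (es.map (fun x => min e x)).sum := (hinterp e hpe hte).symm
        have hd' : ∀ x ∈ done ++ [e], x ≤ e := by
          intro x hx
          rcases List.mem_append.mp hx with hx' | hx'
          · exact le_trans (hd x hx') hpe
          · simp at hx'
            omega
        have ht' : ∀ x ∈ t', e ≤ x := (List.pairwise_cons.mp hp).1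
        have hp' : t'.Pairwise (· ≤ ·) := (List.pairwise_cons.mp hp).2
        have heq' : es = (done ++ [e]) ++ t' := by rw [heq, List.append_assoc]; rfl
        have hlen' : (((done ++ [e]).length : Nat) : Int) = ((done.length : Nat) : Int) + 1 := by
          simp
        have hacc' : (es.map (fun x => min e x)).sum ≤ rem := by
          rw [← hstep]
          omega
        have IH := ih (done ++ [e]) e heq' hd' ht' hp' (by omega) hacc'
        rw [hres, hstep, ← hlen']
        exact IH

theorem pvExtras_eq (sz : PySem.Dict String Int) :
    ∀ (l : List String) (acc : List String) (L R : Int), l.Nodup →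
    ((acc.length : Int) ≤ L) → (∀ x ∈ acc, x ∉ l) →
    pvExtras sz l L R acc = acc ++ (l.filter (fun g => decide (R < sz.getD g 0 - 2))).take (L - (acc.length : Int)).toNat := by
  intro l
  induction l with
  | nil => intro acc L R _ _ _; simp [pvExtras]
  | cons g rest ih =>
      intro acc L R hnd hlen hfresh
      obtain ⟨hg, hndr⟩ := List.nodup_cons.mp hnd
      by_cases hstop : L ≤ (acc.length : Int)
      · have hL : L = (acc.length : Int) := by omega
        simp only [pvExtras, PySem.Set.len]
        rw [if_pos hstop, hL]
        simp
      · by_cases hRe : R < sz.getD g 0 - 2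
        · have hgacc : g ∉ acc := fun hmem => (hfresh g hmem) (by simp)
          have hadd : PySem.Set.add acc g = acc ++ [g] := by
            simp [PySem.Set.add, PySem.Set.contains, hgacc]
          have hfresh' : ∀ x ∈ acc ++ [g], x ∉ rest := by
            intro x hx
            rcases List.mem_append.mp hx with hx' | hx'
            · exact fun hm => (hfresh x hx') (List.mem_cons_of_mem _ hm)
            · simp at hx'
              subst hx'
              exact hg
          have IH := ih (acc ++ [g]) L R hndr (by simp; omega) hfresh'
          simp only [pvExtras, PySem.Set.len]
          rw [if_neg hstop, if_pos hRe, hadd, IH]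
          rw [List.filter_cons, if_pos (by simpa using hRe)]
          have harith : (L - (acc.length : Int)).toNat = (L - ((acc ++ [g]).length : Int)).toNat + 1 := by
            simp only [List.length_append, List.length_cons, List.length_nil]
            push_cast
            omega
          rw [harith, List.take_succ_cons, List.append_assoc]
          rfl
        · have IH := ih acc L R hndr hlen (fun x hx => fun hm => (hfresh x hx) (List.mem_cons_of_mem _ hm))
          simp only [pvExtras, PySem.Set.len]
          rw [if_neg hstop, if_neg hRe, IH, List.filter_cons, if_neg (by simpa using hRe)]

-- last element of a ≤-sorted list bounds all of it, and is one of them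
theorem pvLast_spec (es : List Int) (hne : es ≠ []) (hp : es.Pairwise (· ≤ ·)) :
    PySem.List.pyGetD es (-1) 0 ∈ es ∧ ∀ x ∈ es, x ≤ PySem.List.pyGetD es (-1) 0 := by
  induction es with
  | nil => exact absurd rfl hne
  | cons e t ih =>
      cases t with
      | nil =>
          constructor
          · simp [PySem.List.pyGetD, PySem.List.pyGet?, PySem.List.pyIdx?]
          · intro x hx
            simp at hx
            subst hx
            simp [PySem.List.pyGetD, PySem.List.pyGet?, PySem.List.pyIdx?]
      | cons e2 t2 =>
          have hne2 : (e2 :: t2) ≠ [] := by simp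
          have hp2 : (e2 :: t2).Pairwise (· ≤ ·) := (List.pairwise_cons.mp hp).2
          have IH := ih hne2 hp2
          have hlast : PySem.List.pyGetD (e :: e2 :: t2) (-1) 0 = PySem.List.pyGetD (e2 :: t2) (-1) 0 := by
            simp [PySem.List.pyGetD, PySem.List.pyGet?, PySem.List.pyIdx?]
            omega
          rw [hlast]
          constructor
          · exact List.mem_cons_of_mem _ IH.1
          · intro x hx
            rcases List.mem_cons.mp hx with rfl | hx'
            · exact (List.pairwise_cons.mp hp).1 _ IH.1
            · exact IH.2 x hx'


-- lookup outside the keys gives the default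
theorem pvGetD_not_mem (d : PySem.Dict String Int) (x : String) (h : x ∉ d.keys) : d.getD x 0 = 0 := by
  apply PySem.Dict.getD_of_not_contains
  rw [PySem.Dict.contains_eq_decide_mem_keys]
  simp [h]

-- keys of a dict built from scratch over a duplicate-free list
theorem pvKeys_build (f : String → Int) (l : List String) (h : l.Nodup) :
    (l.foldl (fun d g => d.insert g (f g)) PySem.Dict.empty).keys = l := by
  rw [PySem.Dict.keys_foldl_insert, PySem.Dict.keys_empty]
  exact PySem.Set.ofList_eq_self_of_nodup l h

-- A's `already` equals B's count of nonempty groups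
theorem pvAlready (sz : PySem.Dict String Int) (K : List String) (hnd : K.Nodup)
    (hpos : ∀ x, 0 ≤ sz.getD x 0) :
    (K.foldl (fun d g => d.insert g (min 1 (sz.getD g 0))) PySem.Dict.empty).values.sum
      = ((K.countP fun g => decide (0 < sz.getD g 0) : Nat) : Int) := by
  have hitems := pvItems_foldl_insertF (fun g => min 1 (sz.getD g 0)) K hnd
  have hvals : (K.foldl (fun d g => d.insert g (min 1 (sz.getD g 0))) PySem.Dict.empty).values
      = K.map (fun g => min 1 (sz.getD g 0)) := by
    show ((K.foldl (fun d g => d.insert g (min 1 (sz.getD g 0))) PySem.Dict.empty).items).map (·.2)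
      = K.map (fun g => min 1 (sz.getD g 0))
    rw [hitems, List.map_map]
    rfl
  rw [hvals, pvSum_min_one (fun g => sz.getD g 0) K (fun g _ => hpos g)]


-- ---- the main equivalence ----

theorem pvMain (groups : List (String × List Int)) (need small_threshold : Int) :
    allocate_simple_by_group_size groups need small_threshold
      = allocate_simple_by_group_size_alt groups need small_threshold := by
  have hnd : (pvSizes groups).keys.Nodup := pvSizes_keys_nodup groups
  have hpos : ∀ x, 0 ≤ (pvSizes groups).getD x 0 := pvSizes_nonneg groups
  unfold allocate_simple_by_group_size allocate_simple_by_group_size_alt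
  dsimp only
  set sz := pvSizes groups with hszdef
  set K := sz.keys with hKdef
  by_cases h1 : need ≤ 0 ∨ (K.length : Int) = 0
  · rw [if_pos h1, if_pos h1]
  · rw [if_neg h1, if_neg h1]
    set order := PySem.List.sorted K (fun k => sz.getD k 0) true with horderdef
    have horderperm : order.Perm K := PySem.List.sorted_perm K (fun k => sz.getD k 0) true
    have hordernd : order.Nodup := horderperm.symm.nodup hnd
    by_cases h2 : need < (K.length : Int)
    · rw [if_pos h2, if_pos h2]
      set top := order.take need.toNat with htopdef
      have htopsub : ∀ x ∈ top, x ∈ K := fun x hx => horderperm.mem_iff.mp (List.mem_of_mem_take hx)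
      set zeroed : PySem.Dict String Int := K.foldl (fun d g => d.insert g 0) PySem.Dict.empty with hzdef
      set L : PySem.Dict String Int := top.foldl (fun d g => d.insert g 1) zeroed with hLdef
      have hzk : zeroed.keys = K := pvKeys_build (fun _ => 0) K hnd
      have hkeysL : L.keys = K :=
        (pvKeys_foldl_insertF (fun _ => 1) top zeroed (by rw [hzk]; exact htopsub)).trans hzk
      have hitemsL : L.items = K.map (fun g => (g, L.getD g 0)) := by
        have h := PySem.Dict.items_eq_map_keys L (by rw [hkeysL]; exact hnd) 0
        rw [hkeysL] at h
        exact h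
      have hitemsR : (K.foldl (fun d g => d.insert g (if (PySem.Set.ofList top).contains g = true then 1 else 0)) PySem.Dict.empty).items
          = K.map (fun g => (g, if (PySem.Set.ofList top).contains g = true then (1:Int) else 0)) :=
        pvItems_foldl_insertF _ K hnd
      rw [hitemsL, hitemsR]
      apply List.map_congr_left
      intro g hg
      have hLg : L.getD g 0 = if g ∈ top then 1 else zeroed.getD g 0 :=
        pvGetD_foldl_insertF (fun _ => 1) top zeroed g 0
      have hZg : zeroed.getD g 0 = if g ∈ K then 0 else (PySem.Dict.empty : PySem.Dict String Int).getD g 0 :=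
        pvGetD_foldl_insertF (fun _ => 0) K PySem.Dict.empty g 0
      rw [hLg, hZg]
      by_cases hmem : g ∈ top
      · have hcont : (PySem.Set.ofList top).contains g = true :=
          (PySem.Set.contains_iff _ _).mpr ((PySem.Set.mem_ofList _ _).mpr hmem)
        rw [if_pos hmem, hcont]
        simp
      · have hcont : ¬ (PySem.Set.ofList top).contains g = true := by
          rw [PySem.Set.contains_iff _ _, PySem.Set.mem_ofList]
          exact hmem
        simp only [Bool.not_eq_true] at hcont
        rw [if_neg hmem, if_pos hg, hcont]
        simp
    · rw [if_neg h2, if_neg h2]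
      rw [pvAlready sz K hnd hpos]
      by_cases h3 : need - ((K.countP fun g => decide (0 < sz.getD g 0) : Nat) : Int) ≤ 0
      · rw [if_pos h3, if_pos h3]
      · rw [if_neg h3, if_neg h3]
        set rem0 : Int := need - ((K.countP fun g => decide (0 < sz.getD g 0) : Nat) : Int) with hrem0def
        have hrem0 : 0 < rem0 := by omega
        set large : List String := order.filter (fun g => decide (small_threshold < sz.getD g 0) && decide (1 < sz.getD g 0)) with hlargedef
        have hLnd : large.Nodup := hordernd.filter _
        have hL2 : ∀ g ∈ large, 2 ≤ sz.getD g 0 := by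
          intro g hg
          have hq := (List.mem_filter.mp hg).2
          simp at hq
          omega
        have hLsub : ∀ g ∈ large, g ∈ K := fun g hg => horderperm.mem_iff.mp (List.mem_filter.mp hg).1
        set es : List Int := PySem.List.sorted (large.map (fun g => sz.getD g 0 - 2)) (fun x => x) false with hesdef
        have hesperm : es.Perm (large.map (fun g => sz.getD g 0 - 2)) :=
          PySem.List.sorted_perm (large.map (fun g => sz.getD g 0 - 2)) (fun x => x) false
        have hesp : es.Pairwise (· ≤ ·) :=
          PySem.List.sorted_pairwise (large.map (fun g => sz.getD g 0 - 2)) (fun x => x)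
        have hesnn : ∀ x ∈ es, 0 ≤ x := by
          intro x hx
          obtain ⟨g, hg, rfl⟩ := List.mem_map.mp (hesperm.mem_iff.mp hx)
          have := hL2 g hg
          omega
        have hfes : ∀ k : Int, pvFS sz large k = (es.map (fun x => min k x)).sum := by
          intro k
          have h1 : (es.map (fun x => min k x)).Perm ((large.map (fun g => sz.getD g 0 - 2)).map (fun x => min k x)) :=
            hesperm.map _
          rw [List.Perm.sum_eq h1, List.map_map]
          rfl
        have hT : es.sum = (large.map (pvEx sz)).sum := by
          rw [hesperm.sum_eq]
          rfl
        set alloc0 : PySem.Dict String Int := K.foldl (fun d g => d.insert g (min 1 (sz.getD g 0))) PySem.Dict.empty with halloc0def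
        have halloc0 : ∀ x, alloc0.getD x 0 = min 1 (sz.getD x 0) := by
          intro x
          have h := pvGetD_foldl_insertF (fun g => min 1 (sz.getD g 0)) K PySem.Dict.empty x 0
          rw [halloc0def, h]
          by_cases hx : x ∈ K
          · rw [if_pos hx]
          · rw [if_neg hx, PySem.Dict.getD_empty]
            have h0 : sz.getD x 0 = 0 := pvGetD_not_mem sz x (by rw [← hKdef]; exact hx)
            omega
        have halloc0k : alloc0.keys = K := pvKeys_build _ K hnd
        have hstate0 : ∀ g ∈ large, alloc0.getD g 0 = 1 + min 0 (pvEx sz g) := by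
          intro g hg
          rw [halloc0 g]
          have := hL2 g hg
          unfold pvEx
          omega
        have hkeys0 : ∀ g ∈ large, g ∈ alloc0.keys := by
          intro g hg
          rw [halloc0k]
          exact hLsub g hg
        by_cases hcase : es.sum ≤ rem0
        · -- pass 1 saturates every large group at its soft cap
          rw [if_pos hcase, if_neg (by omega : ¬ rem0 < es.sum), if_neg (by omega : ¬ rem0 < es.sum)]
          set R : Int := if es ≠ [] then PySem.List.pyGetD es (-1) 0 else 0 with hRdef
          have hsat : ∀ g ∈ large, pvEx sz g ≤ R := by
            intro g hg
            have hmem : sz.getD g 0 - 2 ∈ es := hesperm.mem_iff.mpr (List.mem_map_of_mem hg)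
            have hne : es ≠ [] := by
              intro h0
              rw [h0] at hmem
              simp at hmem
            have := (pvLast_spec es hne hesp).2 _ hmem
            rw [hRdef, if_pos hne]
            unfold pvEx
            omega
          have hR0 : 0 ≤ R := by
            rw [hRdef]
            by_cases hne : es ≠ []
            · rw [if_pos hne]
              exact hesnn _ (pvLast_spec es hne hesp).1
            · rw [if_neg hne]
          have hfsR : pvFS sz large R = es.sum := by
            rw [pvFS_sat sz large hsat, hT]
          have hXnil : pvX sz large rem0 R = [] := by
            unfold pvX
            have hfilt : large.filter (fun g => decide (R < pvEx sz g)) = [] := by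
              rw [List.filter_eq_nil_iff]
              intro g hg
              have := hsat g hg
              simp
              omega
            rw [hfilt, List.take_nil]
          have hloop := pvLoop1_char sz large hLnd hL2 rem0 R hR0 (by omega) (Or.inr hsat)
            R.toNat 0 alloc0 (by simp) le_rfl hR0 hkeys0 hstate0
          rw [pvFS_zero sz large hL2, sub_zero] at hloop
          obtain ⟨hlk, hlr, hlpt⟩ := hloop
          rw [hXnil] at hlr hlpt
          simp only [List.length_nil, Nat.cast_zero, sub_zero] at hlr
          rw [hfsR] at hlr
          by_cases h4 : rem0 - es.sum = 0
          · rw [if_pos (by omega : (pvLoop1 sz large alloc0 rem0).2 ≤ 0), if_pos h4]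
            set D1 := (pvLoop1 sz large alloc0 rem0).1 with hD1def
            have hkeysD : D1.keys = K := by rw [hD1def, hlk, halloc0k]
            have hitemsA : D1.items = K.map (fun g => (g, D1.getD g 0)) := by
              have h := PySem.Dict.items_eq_map_keys D1 (by rw [hkeysD]; exact hnd) 0
              rw [hkeysD] at h
              exact h
            have hitemsB : (K.foldl (fun d g => d.insert g ((large.foldl (fun d g => d.insert g
                  (1 + min R (sz.getD g 0 - 2) + if PySem.Set.contains PySem.Set.empty g = true then 1 else 0))
                  PySem.Dict.empty).getD g (min 1 (sz.getD g 0)))) PySem.Dict.empty).items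
                = K.map (fun g => (g, (large.foldl (fun d g => d.insert g
                  (1 + min R (sz.getD g 0 - 2) + if PySem.Set.contains PySem.Set.empty g = true then 1 else 0))
                  PySem.Dict.empty).getD g (min 1 (sz.getD g 0)))) :=
              pvItems_foldl_insertF _ K hnd
            rw [hitemsA, hitemsB]
            apply List.map_congr_left
            intro g hg
            simp only [Prod.mk.injEq, true_and]
            have ha1 : (large.foldl (fun d g => d.insert g
                  (1 + min R (sz.getD g 0 - 2) + if PySem.Set.contains PySem.Set.empty g = true then 1 else 0))
                  PySem.Dict.empty).getD g (min 1 (sz.getD g 0))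
                = if g ∈ large then (1 + min R (sz.getD g 0 - 2) + if PySem.Set.contains PySem.Set.empty g = true then 1 else 0)
                  else (PySem.Dict.empty : PySem.Dict String Int).getD g (min 1 (sz.getD g 0)) :=
              pvGetD_foldl_insertF _ large PySem.Dict.empty g (min 1 (sz.getD g 0))
            rw [hD1def, hlpt g, ha1]
            by_cases hgl : g ∈ large
            · rw [if_pos hgl, if_pos hgl]
              simp [pvEx]
            · rw [if_neg hgl, if_neg hgl, halloc0 g, PySem.Dict.getD_empty]
          · -- leftover slots remain after pass 1: passes 2, 3 and the final fill
            rw [if_neg (by omega : ¬ (pvLoop1 sz large alloc0 rem0).2 ≤ 0), if_neg h4, hlr]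
            have hD1pt : ∀ g ∈ large, (pvLoop1 sz large alloc0 rem0).1.getD g 0 = sz.getD g 0 - 1 := by
              intro g hg
              have h := hlpt g
              rw [if_pos hg] at h
              have hm := min_eq_right (hsat g hg)
              rw [hm] at h
              simp only [List.not_mem_nil, if_false] at h
              unfold pvEx at h
              omega
            have hD1state : ∀ g ∈ large, (pvLoop1 sz large alloc0 rem0).1.getD g 0 = sz.getD g 0 - 1
                ∧ 2 ≤ sz.getD g 0 ∧ g ∈ (pvLoop1 sz large alloc0 rem0).1.keys := by
              intro g hg
              exact ⟨hD1pt g hg, hL2 g hg, by rw [hlk, halloc0k]; exact hLsub g hg⟩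
            have hfill := pvFill_ones sz large (pvLoop1 sz large alloc0 rem0).1
              (rem0 - es.sum) hLnd (by omega) hD1state
            obtain ⟨hfk, hfr, hfpt⟩ := hfill
            -- the duplicate-free prefix taken by pass 2, on both sides
            have htksub : (large.take (min (rem0 - es.sum) (large.length : Int)).toNat).Sublist large :=
              List.take_sublist _ _
            have hofl : PySem.Set.ofList (large.take (min (rem0 - es.sum) (large.length : Int)).toNat)
                = large.take (min (rem0 - es.sum) (large.length : Int)).toNat :=
              PySem.Set.ofList_eq_self_of_nodup _ (htksub.nodup hLnd)
            have hlen2 : ((PySem.Set.ofList (large.take (min (rem0 - es.sum) (large.length : Int)).toNat)).len)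
                = min (rem0 - es.sum) (large.length : Int) := by
              rw [hofl]
              simp only [PySem.Set.len]
              rw [List.length_take]
              push_cast
              omega
            by_cases h5 : (pvFill sz large (pvLoop1 sz large alloc0 rem0).1 (rem0 - es.sum)).2 ≤ 0
            · rw [if_pos h5]
              have hB0 : rem0 - es.sum - ((PySem.Set.ofList (large.take (min (rem0 - es.sum) (large.length : Int)).toNat)).len) = 0 := by
                rw [hlen2]
                omega
              rw [if_pos hB0]
              set D2 := (pvFill sz large (pvLoop1 sz large alloc0 rem0).1 (rem0 - es.sum)).1 with hD2def
              have hkeysD : D2.keys = K := by rw [hD2def, hfk, hlk, halloc0k]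
              have hitemsA : D2.items = K.map (fun g => (g, D2.getD g 0)) := by
                have h := PySem.Dict.items_eq_map_keys D2 (by rw [hkeysD]; exact hnd) 0
                rw [hkeysD] at h
                exact h
              have hitemsB : (K.foldl (fun d g => d.insert g ((large.foldl (fun d g => d.insert g
                    (sz.getD g 0 - 1 + if PySem.Set.contains (PySem.Set.ofList (large.take (min (rem0 - es.sum) (large.length : Int)).toNat)) g = true then 1 else 0))
                    PySem.Dict.empty).getD g (min 1 (sz.getD g 0)))) PySem.Dict.empty).items
                  = K.map (fun g => (g, (large.foldl (fun d g => d.insert g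
                    (sz.getD g 0 - 1 + if PySem.Set.contains (PySem.Set.ofList (large.take (min (rem0 - es.sum) (large.length : Int)).toNat)) g = true then 1 else 0))
                    PySem.Dict.empty).getD g (min 1 (sz.getD g 0)))) :=
                pvItems_foldl_insertF _ K hnd
              rw [hitemsA, hitemsB]
              apply List.map_congr_left
              intro g hg
              simp only [Prod.mk.injEq, true_and]
              have ha2 : (large.foldl (fun d g => d.insert g
                    (sz.getD g 0 - 1 + if PySem.Set.contains (PySem.Set.ofList (large.take (min (rem0 - es.sum) (large.length : Int)).toNat)) g = true then 1 else 0))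
                    PySem.Dict.empty).getD g (min 1 (sz.getD g 0))
                  = if g ∈ large then (sz.getD g 0 - 1 + if PySem.Set.contains (PySem.Set.ofList (large.take (min (rem0 - es.sum) (large.length : Int)).toNat)) g = true then 1 else 0)
                    else (PySem.Dict.empty : PySem.Dict String Int).getD g (min 1 (sz.getD g 0)) :=
                pvGetD_foldl_insertF _ large PySem.Dict.empty g (min 1 (sz.getD g 0))
              rw [hD2def, hfpt g, ha2]
              by_cases hgl : g ∈ large
              · rw [if_pos hgl, hD1pt g hgl]
                by_cases hgt : g ∈ large.take (min (rem0 - es.sum) (large.length : Int)).toNat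
                · rw [if_pos hgt, (PySem.Set.contains_iff _ _).mpr (by rw [hofl]; exact hgt)]
                  simp
                · have hc : PySem.Set.contains (PySem.Set.ofList (large.take (min (rem0 - es.sum) (large.length : Int)).toNat)) g = false := by
                    rcases Bool.eq_false_or_eq_true (PySem.Set.contains (PySem.Set.ofList (large.take (min (rem0 - es.sum) (large.length : Int)).toNat)) g) with h | h
                    · exact absurd (by rw [hofl] at h; exact (PySem.Set.contains_iff _ _).mp h) hgt
                    · exact h
                  rw [if_neg hgt, hc]
                  simp
              · rw [if_neg hgl]
                have hnt : g ∉ large.take (min (rem0 - es.sum) (large.length : Int)).toNat :=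
                  fun hm => hgl (htksub.mem hm)
                rw [if_neg hnt]
                have h := hlpt g
                rw [if_neg hgl] at h
                rw [h, halloc0 g, PySem.Dict.getD_empty]
                ring
            · -- pass 2 fills every large group: pass 3 and possibly the final fill
              rw [if_neg h5]
              have hmfull : min (rem0 - es.sum) (large.length : Int) = (large.length : Int) := by omega
              have htkfull : large.take (min (rem0 - es.sum) (large.length : Int)).toNat = large := by
                rw [hmfull]
                simp
              have hB0 : ¬ (rem0 - es.sum - ((PySem.Set.ofList (large.take (min (rem0 - es.sum) (large.length : Int)).toNat)).len) = 0) := by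
                rw [hlen2]
                omega
              rw [if_neg hB0]
              set others : List String := order.filter (fun g => !large.contains g && decide (1 < sz.getD g 0)) with hothersdef
              have hOnd : others.Nodup := hordernd.filter _
              have hOmem : ∀ g ∈ others, g ∉ large ∧ 1 < sz.getD g 0 := by
                intro g hg
                have hq := (List.mem_filter.mp hg).2
                simp only [Bool.and_eq_true, Bool.not_eq_true', decide_eq_true_eq] at hq
                refine ⟨fun hm => ?_, hq.2⟩
                have hc := hq.1
                rw [List.contains_eq_mem g large] at hc
                simp [hm] at hc
              have hOsub : ∀ g ∈ others, g ∈ K := fun g hg => horderperm.mem_iff.mp (List.mem_filter.mp hg).1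
              have ha2keys : (large.foldl (fun d g => d.insert g
                    (sz.getD g 0 - 1 + if PySem.Set.contains (PySem.Set.ofList (large.take (min (rem0 - es.sum) (large.length : Int)).toNat)) g = true then 1 else 0))
                    PySem.Dict.empty).keys = large :=
                pvKeys_build _ large hLnd
              have hcont2 : ∀ g : String, (large.foldl (fun d g => d.insert g
                    (sz.getD g 0 - 1 + if PySem.Set.contains (PySem.Set.ofList (large.take (min (rem0 - es.sum) (large.length : Int)).toNat)) g = true then 1 else 0))
                    PySem.Dict.empty).contains g = large.contains g := by
                intro g
                rw [PySem.Dict.contains_eq_decide_mem_keys, ha2keys]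
                exact (List.contains_eq_mem g large).symm
              have hothersB : order.filter (fun g => !(large.foldl (fun d g => d.insert g
                    (sz.getD g 0 - 1 + if PySem.Set.contains (PySem.Set.ofList (large.take (min (rem0 - es.sum) (large.length : Int)).toNat)) g = true then 1 else 0))
                    PySem.Dict.empty).contains g && decide (1 < sz.getD g 0)) = others := by
                rw [hothersdef]
                exact List.filter_congr (fun g _ => by rw [hcont2 g])
              rw [hothersB]
              have hremB : rem0 - es.sum - ((PySem.Set.ofList (large.take (min (rem0 - es.sum) (large.length : Int)).toNat)).len)
                  = (pvFill sz large (pvLoop1 sz large alloc0 rem0).1 (rem0 - es.sum)).2 := by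
                rw [hlen2, hfr]
              rw [hremB]
              -- pass-3 lockstep
              have hD2a : ∀ g ∈ others, (pvFill sz large (pvLoop1 sz large alloc0 rem0).1 (rem0 - es.sum)).1.getD g 0 = 1
                  ∧ 2 ≤ sz.getD g 0 ∧ g ∈ (pvFill sz large (pvLoop1 sz large alloc0 rem0).1 (rem0 - es.sum)).1.keys := by
                intro g hg
                obtain ⟨hgl, hgs⟩ := hOmem g hg
                have h := hfpt g
                rw [if_neg (fun hm => hgl (htksub.mem hm))] at h
                have h2' := hlpt g
                rw [if_neg hgl] at h2'
                refine ⟨?_, by omega, by rw [hfk, hlk, halloc0k]; exact hOsub g hg⟩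
                rw [h, h2', halloc0 g]
                omega
              have hrel : ∀ x, (pvFill sz large (pvLoop1 sz large alloc0 rem0).1 (rem0 - es.sum)).1.getD x 0
                  = (large.foldl (fun d g => d.insert g
                    (sz.getD g 0 - 1 + if PySem.Set.contains (PySem.Set.ofList (large.take (min (rem0 - es.sum) (large.length : Int)).toNat)) g = true then 1 else 0))
                    PySem.Dict.empty).getD x (min 1 (sz.getD x 0)) := by
                intro x
                have ha2 : (large.foldl (fun d g => d.insert g
                      (sz.getD g 0 - 1 + if PySem.Set.contains (PySem.Set.ofList (large.take (min (rem0 - es.sum) (large.length : Int)).toNat)) g = true then 1 else 0))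
                      PySem.Dict.empty).getD x (min 1 (sz.getD x 0))
                    = if x ∈ large then (sz.getD x 0 - 1 + if PySem.Set.contains (PySem.Set.ofList (large.take (min (rem0 - es.sum) (large.length : Int)).toNat)) x = true then 1 else 0)
                      else (PySem.Dict.empty : PySem.Dict String Int).getD x (min 1 (sz.getD x 0)) :=
                  pvGetD_foldl_insertF _ large PySem.Dict.empty x (min 1 (sz.getD x 0))
                rw [hfpt x, ha2]
                by_cases hxl : x ∈ large
                · rw [if_pos hxl, hD1pt x hxl]
                  have hxt : x ∈ large.take (min (rem0 - es.sum) (large.length : Int)).toNat := by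
                    rw [htkfull]
                    exact hxl
                  rw [if_pos hxt, (PySem.Set.contains_iff _ _).mpr (by rw [hofl]; exact hxt)]
                  simp
                · rw [if_neg hxl, if_neg (fun hm => hxl (htksub.mem hm))]
                  have h := hlpt x
                  rw [if_neg hxl] at h
                  rw [h, halloc0 x, PySem.Dict.getD_empty]
                  simp
              have hpair := pvPass3_pair sz others.length others
                (pvFill sz large (pvLoop1 sz large alloc0 rem0).1 (rem0 - es.sum)).1
                (large.foldl (fun d g => d.insert g
                    (sz.getD g 0 - 1 + if PySem.Set.contains (PySem.Set.ofList (large.take (min (rem0 - es.sum) (large.length : Int)).toNat)) g = true then 1 else 0))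
                    PySem.Dict.empty)
                (pvFill sz large (pvLoop1 sz large alloc0 rem0).1 (rem0 - es.sum)).2
                hOnd (by omega) hD2a hrel
              obtain ⟨p1, p2, p3, p4, p5, p6, p7⟩ := hpair
              rw [← p1]
              by_cases h6 : 0 < (pvPass3 sz others others.length
                  (pvFill sz large (pvLoop1 sz large alloc0 rem0).1 (rem0 - es.sum)).1
                  (pvFill sz large (pvLoop1 sz large alloc0 rem0).1 (rem0 - es.sum)).2).2
              · rw [if_pos h6, if_pos h6]
                have hskip : ∀ g ∈ order, (!large.contains g && decide (1 < sz.getD g 0)) = false →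
                    ¬((pvPass3 sz others others.length (pvFill sz large (pvLoop1 sz large alloc0 rem0).1 (rem0 - es.sum)).1 (pvFill sz large (pvLoop1 sz large alloc0 rem0).1 (rem0 - es.sum)).2).1.getD g 0 < sz.getD g 0) := by
                  intro g hgo hPf
                  have hgno : g ∉ others := by
                    rw [hothersdef]
                    intro hm
                    have hq := (List.mem_filter.mp hm).2
                    rw [hPf] at hq
                    exact Bool.false_ne_true hq
                  have hval := p6 g hgno
                  by_cases hgl : g ∈ large
                  · have h := hfpt g
                    rw [if_pos (by rw [htkfull]; exact hgl)] at h
                    rw [hval, h, hD1pt g hgl]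
                    omega
                  · have hS : ¬ 1 < sz.getD g 0 := by
                      intro hS
                      have hbt : (!large.contains g && decide (1 < sz.getD g 0)) = true := by
                        simp [hS, List.contains_eq_mem, hgl]
                      rw [hPf] at hbt
                      exact Bool.false_ne_true hbt
                    have h := hfpt g
                    rw [if_neg (fun hm => hgl (htksub.mem hm))] at h
                    have h2' := hlpt g
                    rw [if_neg hgl] at h2'
                    rw [hval, h, h2', halloc0 g]
                    have := hpos g
                    omega
                have hfilt := pvFill_filter sz (fun g => !large.contains g && decide (1 < sz.getD g 0)) order
                  (pvPass3 sz others others.length (pvFill sz large (pvLoop1 sz large alloc0 rem0).1 (rem0 - es.sum)).1 (pvFill sz large (pvLoop1 sz large alloc0 rem0).1 (rem0 - es.sum)).2).1 (pvPass3 sz others others.length (pvFill sz large (pvLoop1 sz large alloc0 rem0).1 (rem0 - es.sum)).1 (pvFill sz large (pvLoop1 sz large alloc0 rem0).1 (rem0 - es.sum)).2).2 hskip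
                rw [hfilt]
                have hO3 : ∀ g ∈ others, ((pvPass3 sz others others.length (pvFill sz large (pvLoop1 sz large alloc0 rem0).1 (rem0 - es.sum)).1 (pvFill sz large (pvLoop1 sz large alloc0 rem0).1 (rem0 - es.sum)).2).1.getD g 0 = sz.getD g 0 - 1 ∨ (pvPass3 sz others others.length (pvFill sz large (pvLoop1 sz large alloc0 rem0).1 (rem0 - es.sum)).1 (pvFill sz large (pvLoop1 sz large alloc0 rem0).1 (rem0 - es.sum)).2).1.getD g 0 = sz.getD g 0)
                    ∧ 2 ≤ sz.getD g 0 ∧ g ∈ (pvPass3 sz others others.length (pvFill sz large (pvLoop1 sz large alloc0 rem0).1 (rem0 - es.sum)).1 (pvFill sz large (pvLoop1 sz large alloc0 rem0).1 (rem0 - es.sum)).2).1.keys := by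
                  intro g hg
                  refine ⟨?_, by have := (hOmem g hg).2; omega, by rw [p3, hfk, hlk, halloc0k]; exact hOsub g hg⟩
                  rw [p7 h6 g hg]
                  split_ifs
                  · exact Or.inl rfl
                  · exact Or.inr rfl
                have htp := pvTopUp_pair sz others (pvPass3 sz others others.length (pvFill sz large (pvLoop1 sz large alloc0 rem0).1 (rem0 - es.sum)).1 (pvFill sz large (pvLoop1 sz large alloc0 rem0).1 (rem0 - es.sum)).2).1 (pvPass3B sz others others.length (large.foldl (fun d g => d.insert g
                    (sz.getD g 0 - 1 + if PySem.Set.contains (PySem.Set.ofList (large.take (min (rem0 - es.sum) (large.length : Int)).toNat)) g = true then 1 else 0))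
                    PySem.Dict.empty) (pvFill sz large (pvLoop1 sz large alloc0 rem0).1 (rem0 - es.sum)).2).1 (pvPass3 sz others others.length (pvFill sz large (pvLoop1 sz large alloc0 rem0).1 (rem0 - es.sum)).1 (pvFill sz large (pvLoop1 sz large alloc0 rem0).1 (rem0 - es.sum)).2).2 hOnd hO3 p2
                obtain ⟨q1, q2, q3⟩ := htp
                set D4 := (pvFill sz others (pvPass3 sz others others.length (pvFill sz large (pvLoop1 sz large alloc0 rem0).1 (rem0 - es.sum)).1 (pvFill sz large (pvLoop1 sz large alloc0 rem0).1 (rem0 - es.sum)).2).1 (pvPass3 sz others others.length (pvFill sz large (pvLoop1 sz large alloc0 rem0).1 (rem0 - es.sum)).1 (pvFill sz large (pvLoop1 sz large alloc0 rem0).1 (rem0 - es.sum)).2).2).1 with hD4def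
                have hkeysD : D4.keys = K := by rw [hD4def, q2, p3, hfk, hlk, halloc0k]
                have hitemsA : D4.items = K.map (fun g => (g, D4.getD g 0)) := by
                  have h := PySem.Dict.items_eq_map_keys D4 (by rw [hkeysD]; exact hnd) 0
                  rw [hkeysD] at h
                  exact h
                have hitemsB : (K.foldl (fun d g => d.insert g ((pvTopUp sz others (pvPass3B sz others others.length (large.foldl (fun d g => d.insert g
                    (sz.getD g 0 - 1 + if PySem.Set.contains (PySem.Set.ofList (large.take (min (rem0 - es.sum) (large.length : Int)).toNat)) g = true then 1 else 0))
                    PySem.Dict.empty) (pvFill sz large (pvLoop1 sz large alloc0 rem0).1 (rem0 - es.sum)).2).1 (pvPass3 sz others others.length (pvFill sz large (pvLoop1 sz large alloc0 rem0).1 (rem0 - es.sum)).1 (pvFill sz large (pvLoop1 sz large alloc0 rem0).1 (rem0 - es.sum)).2).2).1.getD g (min 1 (sz.getD g 0)))) PySem.Dict.empty).items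
                    = K.map (fun g => (g, (pvTopUp sz others (pvPass3B sz others others.length (large.foldl (fun d g => d.insert g
                    (sz.getD g 0 - 1 + if PySem.Set.contains (PySem.Set.ofList (large.take (min (rem0 - es.sum) (large.length : Int)).toNat)) g = true then 1 else 0))
                    PySem.Dict.empty) (pvFill sz large (pvLoop1 sz large alloc0 rem0).1 (rem0 - es.sum)).2).1 (pvPass3 sz others others.length (pvFill sz large (pvLoop1 sz large alloc0 rem0).1 (rem0 - es.sum)).1 (pvFill sz large (pvLoop1 sz large alloc0 rem0).1 (rem0 - es.sum)).2).2).1.getD g (min 1 (sz.getD g 0)))) :=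
                  pvItems_foldl_insertF _ K hnd
                rw [hitemsA, hitemsB]
                apply List.map_congr_left
                intro g hg
                simp only [Prod.mk.injEq, true_and]
                rw [hD4def]
                exact q1 g
              · rw [if_neg h6, if_neg h6]
                set D3 := (pvPass3 sz others others.length (pvFill sz large (pvLoop1 sz large alloc0 rem0).1 (rem0 - es.sum)).1 (pvFill sz large (pvLoop1 sz large alloc0 rem0).1 (rem0 - es.sum)).2).1 with hD3def
                have hkeysD : D3.keys = K := by rw [hD3def, p3, hfk, hlk, halloc0k]
                have hitemsA : D3.items = K.map (fun g => (g, D3.getD g 0)) := by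
                  have h := PySem.Dict.items_eq_map_keys D3 (by rw [hkeysD]; exact hnd) 0
                  rw [hkeysD] at h
                  exact h
                have hitemsB : (K.foldl (fun d g => d.insert g ((pvPass3B sz others others.length (large.foldl (fun d g => d.insert g
                    (sz.getD g 0 - 1 + if PySem.Set.contains (PySem.Set.ofList (large.take (min (rem0 - es.sum) (large.length : Int)).toNat)) g = true then 1 else 0))
                    PySem.Dict.empty) (pvFill sz large (pvLoop1 sz large alloc0 rem0).1 (rem0 - es.sum)).2).1.getD g (min 1 (sz.getD g 0)))) PySem.Dict.empty).items
                    = K.map (fun g => (g, (pvPass3B sz others others.length (large.foldl (fun d g => d.insert g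
                    (sz.getD g 0 - 1 + if PySem.Set.contains (PySem.Set.ofList (large.take (min (rem0 - es.sum) (large.length : Int)).toNat)) g = true then 1 else 0))
                    PySem.Dict.empty) (pvFill sz large (pvLoop1 sz large alloc0 rem0).1 (rem0 - es.sum)).2).1.getD g (min 1 (sz.getD g 0)))) :=
                  pvItems_foldl_insertF _ K hnd
                rw [hitemsA, hitemsB]
                apply List.map_congr_left
                intro g hg
                simp only [Prod.mk.injEq, true_and]
                rw [hD3def]
                exact p2 g
        · -- pass 1 stops at the computed water level
          rw [if_neg hcase, if_pos (by omega : rem0 < es.sum), if_pos (by omega : rem0 < es.sum)]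
          have hmin0 : (es.map (fun x => min 0 x)).sum = 0 := by
            have hc : es.map (fun x => min 0 x) = es.map (fun _ => (0:Int)) :=
              List.map_congr_left (fun x hx => min_eq_left (hesnn x hx))
            rw [hc, PySem.List.sum_map_const_int]
            ring
          have hspec := pvFindLevel_spec rem0 es (by omega) (by omega) es [] 0 rfl (by simp)
            hesnn hesp le_rfl (by rw [hmin0]; omega)
          simp only [List.length_nil, Nat.cast_zero, hmin0] at hspec
          set R : Int := (pvFindLevel rem0 (es.length : Int) es 0 0 0).1 with hRdef
          obtain ⟨hR0, hfle, hflt, hfu⟩ := hspec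
          have hbr1 : pvFS sz large R ≤ rem0 := by rw [hfes R]; exact hfle
          have hbr2 : rem0 < pvFS sz large (R + 1) := by rw [hfes (R + 1)]; exact hflt
          have hloop := pvLoop1_char sz large hLnd hL2 rem0 R hR0 hbr1 (Or.inl hbr2)
            R.toNat 0 alloc0 (by simp) le_rfl hR0 hkeys0 hstate0
          rw [pvFS_zero sz large hL2, sub_zero] at hloop
          obtain ⟨hlk, hlr, hlpt⟩ := hloop
          have hlenX : ((pvX sz large rem0 R).length : Int) = rem0 - pvFS sz large R := by
            unfold pvX
            rw [List.length_take]
            have hsucc := pvFS_succ sz large R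
            push_cast
            omega
          have ht12 : (pvLoop1 sz large alloc0 rem0).2 = 0 := by omega
          rw [if_pos (by omega : (pvLoop1 sz large alloc0 rem0).2 ≤ 0)]
          rw [show (0:Int) = 0 from rfl, if_pos rfl]
          have hextras : pvExtras sz large (rem0 - (pvFindLevel rem0 (es.length : Int) es 0 0 0).2) ((pvFindLevel rem0 (es.length : Int) es 0 0 0).1) PySem.Set.empty
              = pvX sz large rem0 R := by
            have he := pvExtras_eq sz large ([] : List String) (rem0 - pvFS sz large R) R hLnd (by simp; omega) (by simp)
            rw [hfu, ← hRdef, ← hfes R]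
            show pvExtras sz large (rem0 - pvFS sz large R) R [] = pvX sz large rem0 R
            rw [he, List.nil_append]
            unfold pvX pvEx
            simp
          set D1 := (pvLoop1 sz large alloc0 rem0).1 with hD1def
          have hkeysD : D1.keys = K := by rw [hD1def, hlk, halloc0k]
          have hitemsA : D1.items = K.map (fun g => (g, D1.getD g 0)) := by
            have h := PySem.Dict.items_eq_map_keys D1 (by rw [hkeysD]; exact hnd) 0
            rw [hkeysD] at h
            exact h
          rw [hitemsA, hextras]
          have hitemsB : (K.foldl (fun d g => d.insert g ((large.foldl (fun d g => d.insert g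
                (1 + min R (sz.getD g 0 - 2) + if PySem.Set.contains (pvX sz large rem0 R) g = true then 1 else 0))
                PySem.Dict.empty).getD g (min 1 (sz.getD g 0)))) PySem.Dict.empty).items
              = K.map (fun g => (g, (large.foldl (fun d g => d.insert g
                (1 + min R (sz.getD g 0 - 2) + if PySem.Set.contains (pvX sz large rem0 R) g = true then 1 else 0))
                PySem.Dict.empty).getD g (min 1 (sz.getD g 0)))) :=
            pvItems_foldl_insertF _ K hnd
          rw [hitemsB]
          apply List.map_congr_left
          intro g hg
          simp only [Prod.mk.injEq, true_and]
          have ha1 : (large.foldl (fun d g => d.insert g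
                (1 + min R (sz.getD g 0 - 2) + if PySem.Set.contains (pvX sz large rem0 R) g = true then 1 else 0))
                PySem.Dict.empty).getD g (min 1 (sz.getD g 0))
              = if g ∈ large then (1 + min R (sz.getD g 0 - 2) + if PySem.Set.contains (pvX sz large rem0 R) g = true then 1 else 0)
                else (PySem.Dict.empty : PySem.Dict String Int).getD g (min 1 (sz.getD g 0)) :=
            pvGetD_foldl_insertF _ large PySem.Dict.empty g (min 1 (sz.getD g 0))
          rw [hD1def, hlpt g, ha1]
          by_cases hgl : g ∈ large
          · rw [if_pos hgl, if_pos hgl]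
            by_cases hgX : g ∈ pvX sz large rem0 R
            · rw [if_pos hgX, (PySem.Set.contains_iff _ _).mpr hgX]
              simp [pvEx]
            · rw [if_neg hgX]
              have hc : PySem.Set.contains (pvX sz large rem0 R) g = false := by
                rcases Bool.eq_false_or_eq_true (PySem.Set.contains (pvX sz large rem0 R) g) with h | h
                · exact absurd ((PySem.Set.contains_iff _ _).mp h) hgX
                · exact h
              rw [hc]
              simp [pvEx]
          · rw [if_neg hgl, if_neg hgl, halloc0 g, PySem.Dict.getD_empty]



-- ===== VERDICT (by name: the statement is the Claim_ definition above) =====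
theorem allocate_simple_by_group_size_spec : Claim_equal_allocate_simple_by_group_size := by
  intro groups need small_threshold _
  exact pvMain groups need small_threshold
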